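-- pv_equiv track=rewrite | github.com/VineetMakharia/LeetCode | Hard/305-Number-Of-Islands-2.py | NOI2
-- ===== SOURCE A (Python) =====
-- class DSU:
-- 	def __init__(self,n):
-- 		self.parent = [i for i in range(n)]
-- 		self.rank = [-1 for i in range(n)]
-- 		self.count = 0
-- 		self.isLand = [False for i in range(n)]
--
-- 	def find(self,x):
-- 		if x!=self.parent[x]:
-- 			self.parent[x]=self.find(self.parent[x])
-- 		return self.parent[x]
--
-- 	def union(self,x,y):
-- 		px = self.find(x)
-- 		py = self.find(y)
-- 		rx = self.rank[x]
-- 		ry = self.rank[y]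
--
-- 		if px==py:
-- 			return
-- 		if rx>ry:
-- 			self.parent[py]=px
-- 		elif ry>rx:
-- 			self.parent[px]=py
-- 		else:
-- 			self.parent[py]=px
-- 			self.rank[px]+=1
-- 		self.count-=1
--
-- 	def addLand(self,x):
-- 		self.isLand[x] = True
-- 		self.count +=1
--
-- def NOI2(rows, cols, positions):
-- 	dsu = DSU(rows*cols)
-- 	res = []
-- 	dirs = [(1,0),(0,1),(-1,0),(0,-1)]
-- 	for x,y in positions:
-- 		current = x*cols + y
-- 		dsu.addLand(current)
-- 		for dx,dy in dirs:
-- 			nx = x + dx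
-- 			ny = y + dy
-- 			nei = nx*cols + ny
-- 			if 0<=nx<rows and 0<=ny<cols and dsu.isLand[nei]:
-- 				dsu.union(current,nei)
-- 		res.append(dsu.count)
--
-- 	return res
-- ===== SOURCE B (Python) =====
-- def NOI2(rows, cols, positions):
--     # Flat grid of component labels instead of union-find: each land cell holds a
--     # component id; merging relabels the absorbed component and decrements the count.
--     n = rows * cols
--     label = [None] * n
--     next_id = 0
--     count = 0
--     res = []
--     for x, y in positions:
--         count += 1
--         i = x * cols + y
--         if label[i] is not None:
--             cur = label[i]
--         else:
--             cur = next_id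
--             label[i] = cur
--             next_id += 1
--         neigh = []
--         for nx, ny in ((x + 1, y), (x, y + 1), (x - 1, y), (x, y - 1)):
--             if 0 <= nx < rows and 0 <= ny < cols:
--                 c = label[nx * cols + ny]
--                 if c is not None and c not in neigh:
--                     neigh.append(c)
--         for c in neigh:
--             if c != cur:
--                 for k in range(n):
--                     if label[k] == c:
--                         label[k] = cur
--                 count -= 1
--         res.append(count)
--     return res
-- ===== Notes on version B (the rewrite author's own statement) =====
-- stated objective: alternative
-- what changed: Replaces the union-find (parent/rank arrays, recursive find with path compression) by a flat grid of component labels: each step increments the count, collects the distinct labels of in-grid land neighbours, and for each such label different from the cell's own relabels that whole component and decrements the count; Pre_ excludes only the inputs on which both programs raise IndexError (a flattened position index outside the backing array).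
import Mathlib
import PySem

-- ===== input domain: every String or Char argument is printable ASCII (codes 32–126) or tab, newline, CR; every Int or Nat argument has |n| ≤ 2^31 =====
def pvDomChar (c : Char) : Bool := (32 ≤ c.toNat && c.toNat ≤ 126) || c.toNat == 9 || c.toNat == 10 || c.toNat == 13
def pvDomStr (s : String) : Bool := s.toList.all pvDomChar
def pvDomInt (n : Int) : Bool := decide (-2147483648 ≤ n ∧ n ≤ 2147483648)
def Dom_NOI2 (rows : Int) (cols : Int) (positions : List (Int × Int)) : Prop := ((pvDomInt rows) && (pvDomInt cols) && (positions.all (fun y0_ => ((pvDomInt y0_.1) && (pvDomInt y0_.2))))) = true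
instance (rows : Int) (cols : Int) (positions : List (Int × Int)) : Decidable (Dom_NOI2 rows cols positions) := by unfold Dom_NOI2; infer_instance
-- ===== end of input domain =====

-- B replaces A's union-find (parent/rank arrays, recursive find with path compression)
-- by a flat grid of component labels, merging components by relabelling
-- (objective: alternative — a genuinely different data structure, similar cost on these sizes).

-- ===== PORT A =====
-- Python list indexing/assignment, exact on every index Python accepts:
-- 0 ≤ i < len reads slot i, -len ≤ i < 0 wraps to i + len (IndexError is outside Pre_).
def pvGetI (l : List Int) (i : Int) : Int :=
  if h : 0 ≤ i ∧ i.toNat < l.length then l[i.toNat]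
  else if h2 : -(l.length : Int) ≤ i ∧ i < 0 then l[(i + l.length).toNat]'(by omega)
  else 0

def pvSetI (l : List Int) (i : Int) (v : Int) : List Int :=
  if 0 ≤ i ∧ i.toNat < l.length then l.set i.toNat v
  else if -(l.length : Int) ≤ i ∧ i < 0 then l.set (i + l.length).toNat v
  else l

def pvGetB (l : List Bool) (i : Int) : Bool :=
  if h : 0 ≤ i ∧ i.toNat < l.length then l[i.toNat]
  else if h2 : -(l.length : Int) ≤ i ∧ i < 0 then l[(i + l.length).toNat]'(by omega)
  else false

def pvSetB (l : List Bool) (i : Int) (v : Bool) : List Bool :=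
  if 0 ≤ i ∧ i.toNat < l.length then l.set i.toNat v
  else if -(l.length : Int) ≤ i ∧ i < 0 then l.set (i + l.length).toNat v
  else l

structure DSU where
  parent : List Int
  rank : List Int
  count : Int
  isLand : List Bool
deriving Repr, DecidableEq

-- DSU.find with path compression; the fuel (called with the array length) only makes the
-- recursion structural — on admitted inputs the chain always reaches its root well within it.
def dsuFind : Nat → List Int → Int → List Int × Int
  | 0, p, x => (p, pvGetI p x)
  | f + 1, p, x =>
    let px := pvGetI p x
    if x ≠ px then
      let r := dsuFind f p px
      let p2 := pvSetI r.1 x r.2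
      (p2, pvGetI p2 x)
    else (p, px)

def dsuUnion (s : DSU) (x y : Int) : DSU :=
  let f1 := dsuFind s.parent.length s.parent x
  let px := f1.2
  let f2 := dsuFind f1.1.length f1.1 y
  let p2 := f2.1
  let py := f2.2
  let rx := pvGetI s.rank x
  let ry := pvGetI s.rank y
  if px = py then { s with parent := p2 }
  else if rx > ry then { s with parent := pvSetI p2 py px, count := s.count - 1 }
  else if ry > rx then { s with parent := pvSetI p2 px py, count := s.count - 1 }
  else
    { s with parent := pvSetI p2 py px, rank := pvSetI s.rank px (pvGetI s.rank px + 1),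
             count := s.count - 1 }

def NOI2 (rows : Int) (cols : Int) (positions : List (Int × Int)) : List Int :=
  let n := rows * cols
  let dsu0 : DSU :=
    { parent := PySem.List.pyRange 0 n 1
      rank := (PySem.List.pyRange 0 n 1).map (fun _ => (-1 : Int))
      count := 0
      isLand := (PySem.List.pyRange 0 n 1).map (fun _ => false) }
  let dirs : List (Int × Int) := [(1,0),(0,1),(-1,0),(0,-1)]
  (positions.foldl (fun (st : DSU × List Int) xy =>
      let x := xy.1
      let y := xy.2
      let current := x * cols + y
      -- dsu.addLand(current)
      let s1 : DSU := { st.1 with isLand := pvSetB st.1.isLand current true,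
                                  count := st.1.count + 1 }
      let s2 := dirs.foldl (fun s d =>
          let nx := x + d.1
          let ny := y + d.2
          let nei := nx * cols + ny
          if 0 ≤ nx ∧ nx < rows ∧ 0 ≤ ny ∧ ny < cols ∧ pvGetB s.isLand nei = true then
            dsuUnion s current nei
          else s) s1
      (s2, st.2 ++ [s2.count])) (dsu0, [])).2

-- ===== PORT B =====
-- Python list indexing over the label array (values are Option Int: None = water);
-- same exact semantics as pvGetI/pvSetI above: negative indices wrap, out of range is
-- an IndexError (outside Pre_).
def pvGetO (l : List (Option Int)) (i : Int) : Option Int :=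
  if h : 0 ≤ i ∧ i.toNat < l.length then l[i.toNat]
  else if h2 : -(l.length : Int) ≤ i ∧ i < 0 then l[(i + l.length).toNat]'(by omega)
  else none

def pvSetO (l : List (Option Int)) (i : Int) (v : Option Int) : List (Option Int) :=
  if 0 ≤ i ∧ i.toNat < l.length then l.set i.toNat v
  else if -(l.length : Int) ≤ i ∧ i < 0 then l.set (i + l.length).toNat v
  else l

def NOI2_alt (rows : Int) (cols : Int) (positions : List (Int × Int)) : List Int :=
  let n := rows * cols
  -- [None] * n : empty for n ≤ 0, exactly Python's list repetition
  (positions.foldl (fun (st : List (Option Int) × Int × Int × List Int) xy =>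
      let label := st.1
      let nextId := st.2.1
      let count := st.2.2.1
      let res := st.2.2.2
      let x := xy.1
      let y := xy.2
      let count1 := count + 1
      let i := x * cols + y
      let cln : Int × List (Option Int) × Int :=
        match pvGetO label i with
        | some c => (c, label, nextId)
        | none => (nextId, pvSetO label i (some nextId), nextId + 1)
      let cur := cln.1
      let label1 := cln.2.1
      let next1 := cln.2.2
      let neigh := [(x + 1, y), (x, y + 1), (x - 1, y), (x, y - 1)].foldl
        (fun acc (q : Int × Int) =>
          if 0 ≤ q.1 ∧ q.1 < rows ∧ 0 ≤ q.2 ∧ q.2 < cols then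
            match pvGetO label1 (q.1 * cols + q.2) with
            | some c => if c ∈ acc then acc else acc ++ [c]
            | none => acc
          else acc) ([] : List Int)
      let lc2 := neigh.foldl (fun (lc : List (Option Int) × Int) c =>
          if c ≠ cur then
            ((PySem.List.pyRange 0 n 1).foldl (fun lab k =>
                if pvGetO lab k = some c then pvSetO lab k (some cur) else lab) lc.1,
             lc.2 - 1)
          else lc) (label1, count1)
      (lc2.1, next1, lc2.2, res ++ [lc2.2]))
    (List.replicate n.toNat (none : Option Int), 0, 0, [])).2.2.2

-- ===== PRECONDITION & SPEC =====
-- Pre_ is exactly the set of inputs on which A returns (A raises IndexError on any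
-- position whose flattened index falls outside the backing arrays; B's label array
-- raises on exactly the same positions).
def Pre_NOI2 (rows : Int) (cols : Int) (positions : List (Int × Int)) : Prop :=
  positions = [] ∨
    (0 < rows * cols ∧ ∀ q ∈ positions,
      -(rows * cols) ≤ q.1 * cols + q.2 ∧ q.1 * cols + q.2 < rows * cols)
instance (rows : Int) (cols : Int) (positions : List (Int × Int)) : Decidable (Pre_NOI2 rows cols positions) := by unfold Pre_NOI2; infer_instance

def pvWitness_NOI2 : Int × Int × (List (Int × Int)) := (2, 3, [(0,0),(1,2),(0,1),(0,0)])

def Spec_NOI2 (rows : Int) (cols : Int) (positions : List (Int × Int)) (out : List Int) : Prop := out = NOI2_alt rows cols positions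
instance (rows : Int) (cols : Int) (positions : List (Int × Int)) (out : List Int) : Decidable (Spec_NOI2 rows cols positions out) := by unfold Spec_NOI2; infer_instance

-- ===== CLAIM (what is proved, stated in full; the proofs are below) =====
def Claim_equal_NOI2 : Prop := ∀ (rows : Int) (cols : Int) (positions : List (Int × Int)), Dom_NOI2 rows cols positions → Pre_NOI2 rows cols positions → Spec_NOI2 rows cols positions (NOI2 rows cols positions)

-- ===== LEMMAS AND PROOFS =====

-- ---- generic facts about the Python-style list primitives ----

def InR {α : Type} (p : List α) (x : Int) : Prop := 0 ≤ x ∧ x < (p.length : Int)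

theorem length_pvSetI (l : List Int) (i v : Int) : (pvSetI l i v).length = l.length := by
  unfold pvSetI; split
  · simp
  · split <;> simp

theorem length_pvSetB (l : List Bool) (i : Int) (v : Bool) : (pvSetB l i v).length = l.length := by
  unfold pvSetB; split
  · simp
  · split <;> simp

theorem length_pvSetO (l : List (Option Int)) (i : Int) (v : Option Int) :
    (pvSetO l i v).length = l.length := by
  unfold pvSetO; split
  · simp
  · split <;> simp

theorem pvGetI_inR (l : List Int) (i : Int) (h : InR l i) :
    pvGetI l i = l[i.toNat]'(by unfold InR at h; omega) := by
  obtain ⟨h0, h1⟩ := h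
  unfold pvGetI
  rw [dif_pos ⟨h0, by omega⟩]

theorem pvGetI_neg (l : List Int) (i : Int) (h : -(l.length : Int) ≤ i ∧ i < 0) :
    pvGetI l i = pvGetI l (i + l.length) := by
  unfold pvGetI
  rw [dif_neg (by omega), dif_pos h, dif_pos ⟨by omega, by omega⟩]

theorem pvSetI_neg (l : List Int) (i v : Int) (h : -(l.length : Int) ≤ i ∧ i < 0) :
    pvSetI l i v = pvSetI l (i + l.length) v := by
  unfold pvSetI
  rw [if_neg (by omega), if_pos h, if_pos ⟨by omega, by omega⟩]

theorem pvSetB_neg (l : List Bool) (i : Int) (v : Bool) (h : -(l.length : Int) ≤ i ∧ i < 0) :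
    pvSetB l i v = pvSetB l (i + l.length) v := by
  unfold pvSetB
  rw [if_neg (by omega), if_pos h, if_pos ⟨by omega, by omega⟩]

theorem pvGetO_neg (l : List (Option Int)) (i : Int) (h : -(l.length : Int) ≤ i ∧ i < 0) :
    pvGetO l i = pvGetO l (i + l.length) := by
  unfold pvGetO
  rw [dif_neg (by omega), dif_pos h, dif_pos ⟨by omega, by omega⟩]

theorem pvSetO_neg (l : List (Option Int)) (i : Int) (v : Option Int)
    (h : -(l.length : Int) ≤ i ∧ i < 0) : pvSetO l i v = pvSetO l (i + l.length) v := by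
  unfold pvSetO
  rw [if_neg (by omega), if_pos h, if_pos ⟨by omega, by omega⟩]

theorem pvGetI_set_self (l : List Int) (i v : Int) (h : InR l i) :
    pvGetI (pvSetI l i v) i = v := by
  obtain ⟨h0, h1⟩ := h
  have hi : i.toNat < l.length := by omega
  unfold pvGetI pvSetI
  rw [if_pos ⟨h0, hi⟩]
  have : i.toNat < (l.set i.toNat v).length := by simpa using hi
  rw [dif_pos ⟨h0, this⟩]
  rw [List.getElem_set, if_pos rfl]

theorem pvGetI_set_ne (l : List Int) (i v z : Int) (hi : InR l i) (hz : 0 ≤ z)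
    (hne : z ≠ i) : pvGetI (pvSetI l i v) z = pvGetI l z := by
  obtain ⟨h0, h1⟩ := hi
  unfold pvGetI pvSetI
  rw [if_pos ⟨h0, by omega⟩]
  by_cases hzr : 0 ≤ z ∧ z.toNat < l.length
  · have hzr' : 0 ≤ z ∧ z.toNat < (l.set i.toNat v).length := by simpa using hzr
    rw [dif_pos hzr', dif_pos hzr]
    rw [List.getElem_set, if_neg (by omega)]
  · have hzr' : ¬(0 ≤ z ∧ z.toNat < (l.set i.toNat v).length) := by simpa using hzr
    rw [dif_neg hzr', dif_neg hzr, dif_neg (by simp; omega), dif_neg (by omega)]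

theorem pvGetB_set_self (l : List Bool) (i : Int) (v : Bool) (h : InR l i) :
    pvGetB (pvSetB l i v) i = v := by
  obtain ⟨h0, h1⟩ := h
  have hi : i.toNat < l.length := by omega
  unfold pvGetB pvSetB
  rw [if_pos ⟨h0, hi⟩]
  have : i.toNat < (l.set i.toNat v).length := by simpa using hi
  rw [dif_pos ⟨h0, this⟩]
  rw [List.getElem_set, if_pos rfl]

theorem pvGetB_set_ne (l : List Bool) (i : Int) (v : Bool) (z : Int) (hi : InR l i)
    (hz : 0 ≤ z) (hne : z ≠ i) : pvGetB (pvSetB l i v) z = pvGetB l z := by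
  obtain ⟨h0, h1⟩ := hi
  unfold pvGetB pvSetB
  rw [if_pos ⟨h0, by omega⟩]
  by_cases hzr : 0 ≤ z ∧ z.toNat < l.length
  · have hzr' : 0 ≤ z ∧ z.toNat < (l.set i.toNat v).length := by simpa using hzr
    rw [dif_pos hzr', dif_pos hzr]
    rw [List.getElem_set, if_neg (by omega)]
  · have hzr' : ¬(0 ≤ z ∧ z.toNat < (l.set i.toNat v).length) := by simpa using hzr
    rw [dif_neg hzr', dif_neg hzr, dif_neg (by simp; omega), dif_neg (by omega)]

theorem pvGetO_set_self (l : List (Option Int)) (i : Int) (v : Option Int) (h : InR l i) :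
    pvGetO (pvSetO l i v) i = v := by
  obtain ⟨h0, h1⟩ := h
  have hi : i.toNat < l.length := by omega
  unfold pvGetO pvSetO
  rw [if_pos ⟨h0, hi⟩]
  have : i.toNat < (l.set i.toNat v).length := by simpa using hi
  rw [dif_pos ⟨h0, this⟩]
  rw [List.getElem_set, if_pos rfl]

theorem pvGetO_set_ne (l : List (Option Int)) (i : Int) (v : Option Int) (z : Int)
    (hi : InR l i) (hz : 0 ≤ z) (hne : z ≠ i) : pvGetO (pvSetO l i v) z = pvGetO l z := by
  obtain ⟨h0, h1⟩ := hi
  unfold pvGetO pvSetO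
  rw [if_pos ⟨h0, by omega⟩]
  by_cases hzr : 0 ≤ z ∧ z.toNat < l.length
  · have hzr' : 0 ≤ z ∧ z.toNat < (l.set i.toNat v).length := by simpa using hzr
    rw [dif_pos hzr', dif_pos hzr]
    rw [List.getElem_set, if_neg (by omega)]
  · have hzr' : ¬(0 ≤ z ∧ z.toNat < (l.set i.toNat v).length) := by simpa using hzr
    rw [dif_neg hzr', dif_neg hzr, dif_neg (by simp; omega), dif_neg (by omega)]

-- get-of-set, any index at all: the result is either the written value or the old read
theorem pvGetO_set_cases (l : List (Option Int)) (i : Int) (v : Option Int) (z : Int) :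
    pvGetO (pvSetO l i v) z = v ∨ pvGetO (pvSetO l i v) z = pvGetO l z := by
  unfold pvSetO
  by_cases hi1 : 0 ≤ i ∧ i.toNat < l.length
  · rw [if_pos hi1]
    unfold pvGetO
    by_cases hz1 : 0 ≤ z ∧ z.toNat < l.length
    · have hz1' : 0 ≤ z ∧ z.toNat < (l.set i.toNat v).length := by simpa using hz1
      rw [dif_pos hz1', dif_pos hz1, List.getElem_set]
      split
      · exact Or.inl rfl
      · exact Or.inr rfl
    · have hz1' : ¬(0 ≤ z ∧ z.toNat < (l.set i.toNat v).length) := by simpa using hz1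
      rw [dif_neg hz1', dif_neg hz1]
      by_cases hz2 : -(l.length : Int) ≤ z ∧ z < 0
      · have hz2' : -((l.set i.toNat v).length : Int) ≤ z ∧ z < 0 := by simpa using hz2
        rw [dif_pos hz2', dif_pos hz2]
        simp only [List.length_set]
        rw [List.getElem_set]
        split
        · exact Or.inl rfl
        · exact Or.inr rfl
      · have hz2' : ¬(-((l.set i.toNat v).length : Int) ≤ z ∧ z < 0) := by simpa using hz2
        rw [dif_neg hz2', dif_neg hz2]
        exact Or.inr rfl
  · rw [if_neg hi1]
    by_cases hi2 : -(l.length : Int) ≤ i ∧ i < 0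
    · rw [if_pos hi2]
      unfold pvGetO
      by_cases hz1 : 0 ≤ z ∧ z.toNat < l.length
      · have hz1' : 0 ≤ z ∧ z.toNat < (l.set (i + l.length).toNat v).length := by
          simpa using hz1
        rw [dif_pos hz1', dif_pos hz1, List.getElem_set]
        split
        · exact Or.inl rfl
        · exact Or.inr rfl
      · have hz1' : ¬(0 ≤ z ∧ z.toNat < (l.set (i + l.length).toNat v).length) := by
          simpa using hz1
        rw [dif_neg hz1', dif_neg hz1]
        by_cases hz2 : -(l.length : Int) ≤ z ∧ z < 0
        · have hz2' : -((l.set (i + l.length).toNat v).length : Int) ≤ z ∧ z < 0 := by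
            simpa using hz2
          rw [dif_pos hz2', dif_pos hz2]
          simp only [List.length_set]
          rw [List.getElem_set]
          split
          · exact Or.inl rfl
          · exact Or.inr rfl
        · have hz2' : ¬(-((l.set (i + l.length).toNat v).length : Int) ≤ z ∧ z < 0) := by
            simpa using hz2
          rw [dif_neg hz2', dif_neg hz2]
          exact Or.inr rfl
    · rw [if_neg hi2]
      exact Or.inr rfl

-- pvGetO commutes with a value map that fixes none
theorem pvGetO_map (l : List (Option Int)) (f : Option Int → Option Int)
    (hf : f none = none) (z : Int) : pvGetO (l.map f) z = f (pvGetO l z) := by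
  unfold pvGetO
  by_cases hz1 : 0 ≤ z ∧ z.toNat < l.length
  · have hz1' : 0 ≤ z ∧ z.toNat < (l.map f).length := by simpa using hz1
    rw [dif_pos hz1', dif_pos hz1, List.getElem_map]
  · have hz1' : ¬(0 ≤ z ∧ z.toNat < (l.map f).length) := by simpa using hz1
    rw [dif_neg hz1', dif_neg hz1]
    by_cases hz2 : -(l.length : Int) ≤ z ∧ z < 0
    · have hz2' : -((l.map f).length : Int) ≤ z ∧ z < 0 := by simpa using hz2
      rw [dif_pos hz2', dif_pos hz2]
      simp only [List.length_map]
      rw [List.getElem_map]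
    · have hz2' : ¬(-((l.map f).length : Int) ≤ z ∧ z < 0) := by simpa using hz2
      rw [dif_neg hz2', dif_neg hz2, hf]

theorem pvSetI_noop (l : List Int) (i : Int) (h : InR l i) :
    pvSetI l i (pvGetI l i) = l := by
  obtain ⟨h0, h1⟩ := h
  unfold pvSetI
  rw [if_pos ⟨h0, by omega⟩, pvGetI_inR l i ⟨h0, h1⟩]
  exact List.set_getElem_self _

-- ---- root machinery for the union-find side ----

def iterP (p : List Int) : Nat → Int → Int
  | 0, x => x
  | k + 1, x => iterP p k (pvGetI p x)

def RootP (p : List Int) (x : Int) : Int := iterP p p.length x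

def LvlOk (p : List Int) (lvl : Int → Nat) : Prop :=
  ∀ x : Int, InR p x →
    InR p (pvGetI p x) ∧ (pvGetI p x = x ∨ lvl (pvGetI p x) < lvl x)

def Bnd (p : List Int) (lvl : Int → Nat) : Prop := ∀ x : Int, InR p x → lvl x < p.length

def Wf (p : List Int) : Prop := ∃ lvl, LvlOk p lvl ∧ Bnd p lvl

def NL (p : List Int) (land : List Bool) : Prop :=
  ∀ z : Int, InR p z → pvGetB land z = false →
    pvGetI p z = z ∧ (∀ w : Int, InR p w → pvGetI p w = z → w = z)

theorem iterP_succ' (p : List Int) (k : Nat) (x : Int) :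
    iterP p (k + 1) x = pvGetI p (iterP p k x) := by
  induction k generalizing x with
  | zero => rfl
  | succ k ih => rw [iterP, ih, iterP]

theorem iterP_fix (p : List Int) (r : Int) (h : pvGetI p r = r) : ∀ k, iterP p k r = r := by
  intro k; induction k with
  | zero => rfl
  | succ k ih => rw [iterP, h, ih]

theorem iterP_InR (p : List Int) (lvl : Int → Nat) (hp : LvlOk p lvl) (x : Int) (hx : InR p x) :
    ∀ k, InR p (iterP p k x) := by
  intro k
  induction k generalizing x with
  | zero => exact hx
  | succ k ih => rw [iterP]; exact ih _ (hp x hx).1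

theorem lvl_iterP_le (p : List Int) (lvl : Int → Nat) (hp : LvlOk p lvl) :
    ∀ (k : Nat) (x : Int), InR p x → lvl (iterP p k x) ≤ lvl x := by
  intro k
  induction k with
  | zero => intro x _; exact le_rfl
  | succ k ih =>
    intro x hx
    rw [iterP]
    rcases (hp x hx).2 with h | h
    · rw [h]; exact ih x hx
    · exact le_trans (ih _ (hp x hx).1) (le_of_lt h)

theorem RootP_fix (p : List Int) (lvl : Int → Nat) (hp : LvlOk p lvl) (hb : Bnd p lvl)
    (x : Int) (hx : InR p x) : pvGetI p (RootP p x) = RootP p x := by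
  have key : ∀ k, pvGetI p (iterP p k x) = iterP p k x ∨ lvl (iterP p k x) + k ≤ lvl x := by
    intro k
    induction k with
    | zero => right; simp [iterP]
    | succ k ih =>
      rcases ih with h | h
      · left; rw [iterP_succ', h, h]
      · have hin : InR p (iterP p k x) := iterP_InR p lvl hp x hx k
        rcases (hp _ hin).2 with hfix | hlt
        · left; rw [iterP_succ', hfix, hfix]
        · right; rw [iterP_succ']; omega
  rcases key p.length with h | h
  · exact h
  · exfalso; have := hb x hx; omega

theorem RootP_InR (p : List Int) (lvl : Int → Nat) (hp : LvlOk p lvl)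
    (x : Int) (hx : InR p x) : InR p (RootP p x) := iterP_InR p lvl hp x hx p.length

theorem RootP_of_fix (p : List Int) (x : Int) (h : pvGetI p x = x) : RootP p x = x :=
  iterP_fix p x h p.length

theorem RootP_step (p : List Int) (lvl : Int → Nat) (hp : LvlOk p lvl) (hb : Bnd p lvl)
    (x : Int) (hx : InR p x) : RootP p (pvGetI p x) = RootP p x := by
  have h1 : iterP p (p.length + 1) x = iterP p p.length x := by
    rw [iterP_succ']; exact RootP_fix p lvl hp hb x hx
  calc RootP p (pvGetI p x) = iterP p p.length (pvGetI p x) := rfl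
    _ = iterP p (p.length + 1) x := by rw [iterP]
    _ = RootP p x := h1

theorem lvl_RootP_le (p : List Int) (lvl : Int → Nat) (hp : LvlOk p lvl)
    (x : Int) (hx : InR p x) : lvl (RootP p x) ≤ lvl x :=
  lvl_iterP_le p lvl hp p.length x hx

theorem lvl_RootP_lt (p : List Int) (lvl : Int → Nat) (hp : LvlOk p lvl) (hb : Bnd p lvl)
    (x : Int) (hx : InR p x) (hnr : pvGetI p x ≠ x) : lvl (RootP p x) < lvl x := by
  have h1 : RootP p x = RootP p (pvGetI p x) := (RootP_step p lvl hp hb x hx).symm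
  have h2 : lvl (RootP p (pvGetI p x)) ≤ lvl (pvGetI p x) :=
    lvl_RootP_le p lvl hp _ (hp x hx).1
  rcases (hp x hx).2 with h | h
  · exact absurd h hnr
  · rw [h1]; omega

theorem RootP_ne (p : List Int) (lvl : Int → Nat) (hp : LvlOk p lvl) (hb : Bnd p lvl)
    (x : Int) (hx : InR p x) (hnr : pvGetI p x ≠ x) : RootP p x ≠ x := by
  intro h
  have := lvl_RootP_lt p lvl hp hb x hx hnr
  rw [h] at this
  omega

-- a RootP value is itself a fixpoint, so it can never equal a non-root
theorem RootP_is_root (p : List Int) (lvl : Int → Nat) (hp : LvlOk p lvl) (hb : Bnd p lvl)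
    (z x : Int) (hz : InR p z) (hnr : pvGetI p x ≠ x) : RootP p z ≠ x := by
  intro h
  have := RootP_fix p lvl hp hb z hz
  rw [h] at this
  exact hnr this

theorem InR_pvSetI (p : List Int) (a b z : Int) : InR (pvSetI p a b) z ↔ InR p z := by
  unfold InR; rw [length_pvSetI]

-- ---- renormalisation: any strictly-decreasing level function can be replaced by one bounded by the length ----

def depF (p : List Int) : Nat → Int → Nat
  | 0, _ => 0
  | f + 1, x => if pvGetI p x = x then 0 else depF p f (pvGetI p x) + 1

def chainL (p : List Int) : Nat → Int → List Int
  | 0, x => [x]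
  | f + 1, x => if pvGetI p x = x then [x] else x :: chainL p f (pvGetI p x)

theorem lvl_step_lt (p : List Int) (lvl : Int → Nat) (hp : LvlOk p lvl) (x : Int)
    (hx : InR p x) (hfix : pvGetI p x ≠ x) : lvl (pvGetI p x) < lvl x := by
  rcases (hp x hx).2 with h | h
  · exact absurd h hfix
  · exact h

theorem depF_stable (p : List Int) (lvl : Int → Nat) (hp : LvlOk p lvl) :
    ∀ (m : Nat) (x : Int) (f g : Nat), InR p x → lvl x < m → lvl x < f → lvl x < g →
      depF p f x = depF p g x := by
  intro m
  induction m with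
  | zero => intro x f g _ h; omega
  | succ m ih =>
    intro x f g hx hm hf hg
    match f, g with
    | f' + 1, g' + 1 =>
      rw [depF, depF]
      by_cases hfix : pvGetI p x = x
      · rw [if_pos hfix, if_pos hfix]
      · have hlt : lvl (pvGetI p x) < lvl x := lvl_step_lt p lvl hp x hx hfix
        rw [if_neg hfix, if_neg hfix,
          ih (pvGetI p x) f' g' (hp x hx).1 (by omega) (by omega) (by omega)]

theorem length_chainL (p : List Int) : ∀ (f : Nat) (x : Int),
    (chainL p f x).length = depF p f x + 1 := by
  intro f
  induction f with
  | zero => intro x; rfl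
  | succ f ih =>
    intro x
    rw [chainL, depF]
    by_cases hfix : pvGetI p x = x
    · rw [if_pos hfix, if_pos hfix]; rfl
    · rw [if_neg hfix, if_neg hfix]; simp [ih]

theorem mem_chainL_InR (p : List Int) (lvl : Int → Nat) (hp : LvlOk p lvl) :
    ∀ (f : Nat) (x : Int), InR p x → ∀ z ∈ chainL p f x, InR p z := by
  intro f
  induction f with
  | zero => intro x hx z hz; simp [chainL] at hz; rwa [hz]
  | succ f ih =>
    intro x hx z hz
    rw [chainL] at hz
    by_cases hfix : pvGetI p x = x
    · rw [if_pos hfix] at hz; simp at hz; rwa [hz]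
    · rw [if_neg hfix] at hz
      rcases List.mem_cons.1 hz with h | h
      · rwa [h]
      · exact ih (pvGetI p x) (hp x hx).1 z h

theorem lvl_mem_chainL_le (p : List Int) (lvl : Int → Nat) (hp : LvlOk p lvl) :
    ∀ (f : Nat) (x : Int), InR p x → ∀ z ∈ chainL p f x, lvl z ≤ lvl x := by
  intro f
  induction f with
  | zero => intro x hx z hz; simp [chainL] at hz; rw [hz]
  | succ f ih =>
    intro x hx z hz
    rw [chainL] at hz
    by_cases hfix : pvGetI p x = x
    · rw [if_pos hfix] at hz; simp at hz; rw [hz]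
    · rw [if_neg hfix] at hz
      rcases List.mem_cons.1 hz with h | h
      · rw [h]
      · have h1 := ih (pvGetI p x) (hp x hx).1 z h
        have h2 : lvl (pvGetI p x) < lvl x := lvl_step_lt p lvl hp x hx hfix
        omega

theorem pairwise_chainL (p : List Int) (lvl : Int → Nat) (hp : LvlOk p lvl) :
    ∀ (f : Nat) (x : Int), InR p x → (chainL p f x).Pairwise (fun u v => lvl v < lvl u) := by
  intro f
  induction f with
  | zero => intro x _; simp [chainL]
  | succ f ih =>
    intro x hx
    rw [chainL]
    by_cases hfix : pvGetI p x = x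
    · rw [if_pos hfix]; simp
    · rw [if_neg hfix]
      refine List.Pairwise.cons ?_ (ih (pvGetI p x) (hp x hx).1)
      intro z hz
      have h1 := lvl_mem_chainL_le p lvl hp f (pvGetI p x) (hp x hx).1 z hz
      have h2 : lvl (pvGetI p x) < lvl x := lvl_step_lt p lvl hp x hx hfix
      omega

theorem pigeon (p : List Int) (l : List Int) (hnd : l.Nodup) (hin : ∀ z ∈ l, InR p z) :
    l.length ≤ p.length := by
  have hmap : (l.map Int.toNat).Nodup := by
    refine List.Nodup.map_on ?_ hnd
    intro u hu v hv huv
    have h1 := hin u hu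
    have h2 := hin v hv
    unfold InR at h1 h2
    omega
  have hsub : l.map Int.toNat ⊆ List.range p.length := by
    intro t ht
    rcases List.mem_map.1 ht with ⟨z, hz, rfl⟩
    have := hin z hz
    unfold InR at this
    rw [List.mem_range]
    omega
  have := (List.subperm_of_subset hmap hsub).length_le
  simpa using this

theorem renorm (p : List Int) (lvl : Int → Nat) (hp : LvlOk p lvl) : Wf p := by
  refine ⟨fun x => depF p (lvl x + 1) x, ?_, ?_⟩
  · intro x hx
    refine ⟨(hp x hx).1, ?_⟩
    by_cases hfix : pvGetI p x = x
    · left; exact hfix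
    · right
      show depF p (lvl (pvGetI p x) + 1) (pvGetI p x) < depF p (lvl x + 1) x
      have hlt : lvl (pvGetI p x) < lvl x := lvl_step_lt p lvl hp x hx hfix
      have hx1 : depF p (lvl x + 1) x = depF p (lvl x) (pvGetI p x) + 1 := by
        rw [depF, if_neg hfix]
      have hx2 : depF p (lvl x) (pvGetI p x) = depF p (lvl (pvGetI p x) + 1) (pvGetI p x) :=
        depF_stable p lvl hp (lvl x + 1) (pvGetI p x) _ _ (hp x hx).1 (by omega) (by omega)
          (by omega)
      omega
  · intro x hx
    have hnd : (chainL p (lvl x + 1) x).Nodup := by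
      have hpw := pairwise_chainL p lvl hp (lvl x + 1) x hx
      refine hpw.imp ?_
      intro u v h heq
      rw [heq] at h
      omega
    have h1 : (chainL p (lvl x + 1) x).length ≤ p.length :=
      pigeon p _ hnd (mem_chainL_InR p lvl hp (lvl x + 1) x hx)
    have h2 := length_chainL p (lvl x + 1) x
    show depF p (lvl x + 1) x < p.length
    omega

-- ---- the effect of a single parent-array write on all roots ----

theorem lvlok_pvSetI (p : List Int) (lvl : Int → Nat) (hp : LvlOk p lvl) (a b : Int)
    (ha : InR p a) (hb : InR p b) (hlt : b = a ∨ lvl b < lvl a) :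
    LvlOk (pvSetI p a b) lvl := by
  intro x hx'
  have hx : InR p x := (InR_pvSetI p a b x).1 hx'
  by_cases hxa : x = a
  · subst hxa
    rw [pvGetI_set_self p x b ha]
    exact ⟨(InR_pvSetI p x b b).2 hb, by tauto⟩
  · rw [pvGetI_set_ne p a b x ha hx.1 hxa]
    exact ⟨(InR_pvSetI p a b _).2 (hp x hx).1, (hp x hx).2⟩

theorem link_lvlok (p : List Int) (lvl : Int → Nat) (hp : LvlOk p lvl) (hbd : Bnd p lvl)
    (a b : Int) (ha : InR p a) (hb : InR p b) (hra : pvGetI p a = a) (hrb : pvGetI p b = b)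
    (hne : b ≠ a) :
    LvlOk (pvSetI p a b) (fun z => if RootP p z = a then lvl z + lvl b + 1 else lvl z) := by
  intro x hx'
  have hx : InR p x := (InR_pvSetI p a b x).1 hx'
  by_cases hxa : x = a
  · subst hxa
    rw [pvGetI_set_self p x b ha]
    refine ⟨(InR_pvSetI p x b b).2 hb, Or.inr ?_⟩
    have e1 : RootP p b = b := RootP_of_fix p b hrb
    have e2 : RootP p x = x := RootP_of_fix p x hra
    simp only [e1, e2, if_neg hne, if_true]
    omega
  · rw [pvGetI_set_ne p a b x ha hx.1 hxa]
    refine ⟨(InR_pvSetI p a b _).2 (hp x hx).1, ?_⟩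
    by_cases hfix : pvGetI p x = x
    · left; exact hfix
    · right
      have hlt : lvl (pvGetI p x) < lvl x := lvl_step_lt p lvl hp x hx hfix
      have he : RootP p (pvGetI p x) = RootP p x := RootP_step p lvl hp hbd x hx
      simp only [he]
      split <;> omega

theorem root_set_char (p : List Int) (lvl lvlq : Int → Nat)
    (hp : LvlOk p lvl) (hbd : Bnd p lvl)
    (a b : Int) (ha : InR p a) (hbIn : InR p b) (hrb : pvGetI p b = b) (hne : b ≠ a)
    (hab : RootP p a = b ∨ pvGetI p a = a)
    (hq : LvlOk (pvSetI p a b) lvlq) (hqb : Bnd (pvSetI p a b) lvlq) :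
    ∀ z, InR p z → RootP (pvSetI p a b) z = if RootP p z = a then b else RootP p z := by
  have hqbfix : pvGetI (pvSetI p a b) b = b := by
    rw [pvGetI_set_ne p a b b ha hbIn.1 hne]; exact hrb
  have hrootqb : RootP (pvSetI p a b) b = b := RootP_of_fix _ b hqbfix
  suffices H : ∀ m z, InR p z → lvlq z < m →
      RootP (pvSetI p a b) z = if RootP p z = a then b else RootP p z by
    intro z hz; exact H (lvlq z + 1) z hz (by omega)
  intro m
  induction m with
  | zero => intro z _ h; omega
  | succ m ih =>
    intro z hz hm
    by_cases hza : z = a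
    · subst hza
      have hqa : pvGetI (pvSetI p z b) z = b := pvGetI_set_self p z b ha
      have h1 := RootP_step (pvSetI p z b) lvlq hq hqb z ((InR_pvSetI p z b z).2 ha)
      rw [hqa, hrootqb] at h1
      by_cases hfix : pvGetI p z = z
      · rw [← h1, RootP_of_fix p z hfix, if_pos rfl]
      · have h2 : RootP p z = b := by tauto
        have h3 : RootP p z ≠ z := RootP_ne p lvl hp hbd z ha hfix
        rw [← h1, if_neg h3, h2]
    · have hzq : pvGetI (pvSetI p a b) z = pvGetI p z := pvGetI_set_ne p a b z ha hz.1 hza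
      by_cases hfix : pvGetI p z = z
      · rw [RootP_of_fix _ z (by rw [hzq]; exact hfix), RootP_of_fix p z hfix, if_neg hza]
      · have hz' : InR (pvSetI p a b) z := (InR_pvSetI p a b z).2 hz
        have hlt : lvlq (pvGetI p z) < lvlq z := by
          have := lvl_step_lt (pvSetI p a b) lvlq hq z hz' (by rw [hzq]; exact hfix)
          rwa [hzq] at this
        have h1 := RootP_step (pvSetI p a b) lvlq hq hqb z hz'
        rw [hzq] at h1
        have h2 := ih (pvGetI p z) (hp z hz).1 (by omega)
        rw [← h1, h2, RootP_step p lvl hp hbd z hz]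

theorem InR_len {α β : Type} (p : List α) (q : List β) (h : q.length = p.length) (z : Int) :
    InR q z ↔ InR p z := by unfold InR; rw [h]

theorem dsuFind_succ_root (f : Nat) (p : List Int) (x : Int) (h : pvGetI p x = x) :
    dsuFind (f + 1) p x = (p, pvGetI p x) := by
  rw [dsuFind]
  simp [h]

theorem dsuFind_succ_step (f : Nat) (p : List Int) (x : Int) (h : pvGetI p x ≠ x) :
    dsuFind (f + 1) p x =
      (pvSetI (dsuFind f p (pvGetI p x)).1 x (dsuFind f p (pvGetI p x)).2,
       pvGetI (pvSetI (dsuFind f p (pvGetI p x)).1 x (dsuFind f p (pvGetI p x)).2) x) := by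
  rw [dsuFind]
  have h' : x ≠ pvGetI p x := fun e => h e.symm
  simp [h']

-- full behaviour of find with path compression: it returns the root and changes no root
theorem find_spec (lvl : Int → Nat) :
    ∀ (fuel : Nat) (p : List Int) (x : Int), LvlOk p lvl → Bnd p lvl → InR p x → lvl x < fuel →
      (dsuFind fuel p x).1.length = p.length ∧
      (dsuFind fuel p x).2 = RootP p x ∧
      LvlOk (dsuFind fuel p x).1 lvl ∧ Bnd (dsuFind fuel p x).1 lvl ∧
      (∀ z, InR p z → RootP (dsuFind fuel p x).1 z = RootP p z) ∧
      (∀ z, InR p z → lvl x < lvl z → pvGetI (dsuFind fuel p x).1 z = pvGetI p z) ∧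
      (∀ z, InR p z → pvGetI p z = z → pvGetI (dsuFind fuel p x).1 z = z) ∧
      (∀ z, InR p z → pvGetI (dsuFind fuel p x).1 z ≠ pvGetI p z →
        pvGetI (dsuFind fuel p x).1 z = RootP p x) := by
  intro fuel
  induction fuel with
  | zero => intro p x _ _ _ h; omega
  | succ f ih =>
    intro p x hp hbd hx hf
    by_cases hfix : pvGetI p x = x
    · rw [dsuFind_succ_root f p x hfix]
      refine ⟨rfl, by rw [hfix]; exact (RootP_of_fix p x hfix).symm, hp, hbd, fun z _ => rfl,
        fun z _ _ => rfl, fun z _ h => h, fun z _ h => absurd rfl h⟩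
    · have hpx : InR p (pvGetI p x) := (hp x hx).1
      have hlt : lvl (pvGetI p x) < lvl x := lvl_step_lt p lvl hp x hx hfix
      obtain ⟨ihlen, ihval, ihlvl, ihbnd, ihroots, ihhigh, ihfixkeep, ihchg⟩ :=
        ih p (pvGetI p x) hp hbd hpx (by omega)
      rw [dsuFind_succ_step f p x hfix]
      set p1 := (dsuFind f p (pvGetI p x)).1 with hp1
      set r := (dsuFind f p (pvGetI p x)).2 with hr
      have hrval : r = RootP p x := by
        rw [ihval]; exact RootP_step p lvl hp hbd x hx
      have hInR1 : ∀ z, InR p1 z ↔ InR p z := fun z => InR_len p p1 ihlen z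
      have hx1 : InR p1 x := (hInR1 x).2 hx
      have hp1x : pvGetI p1 x = pvGetI p x := ihhigh x hx hlt
      have hnr1 : pvGetI p1 x ≠ x := by rw [hp1x]; exact hfix
      have hrInR : InR p r := by
        rw [hrval]; exact RootP_InR p lvl hp x hx
      have hbnd1 : Bnd p1 lvl := ihbnd
      have hroot1px : RootP p1 (pvGetI p x) = r := by
        rw [ihroots (pvGetI p x) hpx, ihval]
      have hroot1x : RootP p1 x = r := by
        have := RootP_step p1 lvl ihlvl hbnd1 x hx1
        rw [hp1x] at this
        rw [← this, hroot1px]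
      have hrfix1 : pvGetI p1 r = r := by
        have := RootP_fix p1 lvl ihlvl hbnd1 x hx1
        rwa [hroot1x] at this
      have hrne : r ≠ x := by
        intro e
        rw [e] at hrfix1
        rw [hp1x] at hrfix1
        exact hfix hrfix1
      have hlvlr : lvl r < lvl x := by
        have h1 : lvl (RootP p (pvGetI p x)) ≤ lvl (pvGetI p x) :=
          lvl_RootP_le p lvl hp (pvGetI p x) hpx
        have h2 : r = RootP p (pvGetI p x) := ihval
        rw [h2]; omega
      have hlvl2 : LvlOk (pvSetI p1 x r) lvl :=
        lvlok_pvSetI p1 lvl ihlvl x r hx1 ((hInR1 r).2 hrInR) (Or.inr hlvlr)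
      have hlen2 : (pvSetI p1 x r).length = p.length := by rw [length_pvSetI]; exact ihlen
      have hbnd2 : Bnd (pvSetI p1 x r) lvl := by
        intro z hz
        have : InR p z := (InR_len p _ hlen2 z).1 hz
        have := hbd z this
        omega
      have hchar := root_set_char p1 lvl lvl ihlvl hbnd1 x r hx1 ((hInR1 r).2 hrInR)
        hrfix1 hrne (Or.inl hroot1x) hlvl2 hbnd2
      have hroots2 : ∀ z, InR p z → RootP (pvSetI p1 x r) z = RootP p z := by
        intro z hz
        rw [hchar z ((hInR1 z).2 hz)]
        rw [if_neg (RootP_is_root p1 lvl ihlvl hbnd1 z x ((hInR1 z).2 hz) hnr1)]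
        exact ihroots z hz
      have hget2x : pvGetI (pvSetI p1 x r) x = r := pvGetI_set_self p1 x r hx1
      refine ⟨hlen2, by rw [hget2x]; exact hrval, hlvl2, hbnd2, hroots2, ?_, ?_, ?_⟩
      · intro z hz hzl
        have hzx : z ≠ x := by intro e; rw [e] at hzl; omega
        rw [pvGetI_set_ne p1 x r z hx1 hz.1 hzx]
        exact ihhigh z hz (by omega)
      · intro z hz hzfix
        have hzx : z ≠ x := by intro e; rw [e] at hzfix; exact hfix hzfix
        rw [pvGetI_set_ne p1 x r z hx1 hz.1 hzx]
        exact ihfixkeep z hz hzfix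
      · intro z hz hchg
        by_cases hzx : z = x
        · rw [hzx, hget2x, hrval]
        · rw [pvGetI_set_ne p1 x r z hx1 hz.1 hzx] at hchg ⊢
          rw [ihchg z hz hchg]
          exact RootP_step p lvl hp hbd x hx

-- ---- land cells: chains from land stay on land, roots of land are land ----

theorem land_step (p : List Int) (land : List Bool) (lvl : Int → Nat) (hp : LvlOk p lvl)
    (hnl : NL p land) (x : Int) (hx : InR p x) (hland : pvGetB land x = true) :
    pvGetB land (pvGetI p x) = true := by
  by_cases hfix : pvGetI p x = x
  · rwa [hfix]
  · by_contra hno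
    have hz : InR p (pvGetI p x) := (hp x hx).1
    have hxz := (hnl (pvGetI p x) hz (by simpa using hno)).2 x hx rfl
    exact hfix hxz.symm

theorem land_iter (p : List Int) (land : List Bool) (lvl : Int → Nat) (hp : LvlOk p lvl)
    (hnl : NL p land) (x : Int) (hx : InR p x) (hland : pvGetB land x = true) :
    ∀ k, pvGetB land (iterP p k x) = true := by
  intro k
  induction k generalizing x with
  | zero => exact hland
  | succ k ih =>
    rw [iterP]
    exact ih (pvGetI p x) (hp x hx).1 (land_step p land lvl hp hnl x hx hland)

theorem land_root (p : List Int) (land : List Bool) (lvl : Int → Nat) (hp : LvlOk p lvl)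
    (hnl : NL p land) (x : Int) (hx : InR p x) (hland : pvGetB land x = true) :
    pvGetB land (RootP p x) = true :=
  land_iter p land lvl hp hnl x hx hland p.length

theorem NL_find (p : List Int) (land : List Bool) (lvl : Int → Nat) (fuel : Nat) (x : Int)
    (hp : LvlOk p lvl) (hbd : Bnd p lvl) (hnl : NL p land) (hx : InR p x)
    (hland : pvGetB land x = true) (hfuel : lvl x < fuel) :
    NL (dsuFind fuel p x).1 land := by
  obtain ⟨hlen, _, _, _, _, _, hfixkeep, hchg⟩ := find_spec lvl fuel p x hp hbd hx hfuel
  intro z hz1 hzland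
  have hz : InR p z := (InR_len p _ hlen z).1 hz1
  obtain ⟨hz2, hz3⟩ := hnl z hz hzland
  refine ⟨hfixkeep z hz hz2, ?_⟩
  intro w hw1 hwz
  have hw : InR p w := (InR_len p _ hlen w).1 hw1
  by_cases hc : pvGetI (dsuFind fuel p x).1 w = pvGetI p w
  · exact hz3 w hw (by rw [← hc]; exact hwz)
  · exfalso
    have h1 := hchg w hw hc
    rw [hwz] at h1
    have h2 := land_root p land lvl hp hnl x hx hland
    rw [← h1] at h2
    rw [h2] at hzland
    cases hzland

-- linking two distinct land roots: effect on all roots, levels, and non-land cells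
theorem link_spec (p2 : List Int) (lvl : Int → Nat) (h2 : LvlOk p2 lvl) (hb2 : Bnd p2 lvl)
    (land : List Bool) (hnl2 : NL p2 land) (a b : Int) (ha : InR p2 a) (hb : InR p2 b)
    (hra : pvGetI p2 a = a) (hrb : pvGetI p2 b = b) (hne : b ≠ a)
    (hlanda : pvGetB land a = true) (hlandb : pvGetB land b = true) :
    Wf (pvSetI p2 a b) ∧ NL (pvSetI p2 a b) land ∧
      (∀ z, InR p2 z → RootP (pvSetI p2 a b) z = if RootP p2 z = a then b else RootP p2 z) := by
  have hlok := link_lvlok p2 lvl h2 hb2 a b ha hb hra hrb hne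
  obtain ⟨lvl3, h3, hb3⟩ := renorm (pvSetI p2 a b) _ hlok
  have hchar := root_set_char p2 lvl lvl3 h2 hb2 a b ha hb hrb hne (Or.inr hra) h3 hb3
  refine ⟨⟨lvl3, h3, hb3⟩, ?_, fun z hz => hchar z hz⟩
  intro z hz1 hzland
  have hz : InR p2 z := (InR_pvSetI p2 a b z).1 hz1
  obtain ⟨hz2, hz3⟩ := hnl2 z hz hzland
  have hza : z ≠ a := by
    intro e
    rw [e, hlanda] at hzland
    cases hzland
  refine ⟨by rw [pvGetI_set_ne p2 a b z ha hz.1 hza]; exact hz2, ?_⟩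
  intro w hw1 hwz
  have hw : InR p2 w := (InR_pvSetI p2 a b w).1 hw1
  by_cases hwa : w = a
  · exfalso
    rw [hwa, pvGetI_set_self p2 a b ha] at hwz
    rw [← hwz, hlandb] at hzland
    cases hzland
  · rw [pvGetI_set_ne p2 a b w ha hw.1 hwa] at hwz
    exact hz3 w hw hwz

theorem ite_link_iff (ru rv a b : Int) (hne : b ≠ a) :
    ((if ru = a then b else ru) = (if rv = a then b else rv)) ↔
      (ru = rv ∨ ((ru = a ∨ ru = b) ∧ (rv = a ∨ rv = b))) := by
  split_ifs <;> omega

-- full behaviour of union: counts two classes as one exactly when the roots already agree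
theorem union_spec (s : DSU) (x y : Int) (lvl : Int → Nat)
    (hp : LvlOk s.parent lvl) (hbd : Bnd s.parent lvl)
    (hnl : NL s.parent s.isLand)
    (hx : InR s.parent x) (hy : InR s.parent y)
    (hlx : pvGetB s.isLand x = true) (hly : pvGetB s.isLand y = true) :
    (dsuUnion s x y).parent.length = s.parent.length ∧
    (dsuUnion s x y).isLand = s.isLand ∧
    (dsuUnion s x y).rank.length = s.rank.length ∧
    (dsuUnion s x y).count =
      (if RootP s.parent x = RootP s.parent y then s.count else s.count - 1) ∧
    Wf (dsuUnion s x y).parent ∧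
    NL (dsuUnion s x y).parent s.isLand ∧
    (∀ u v, InR s.parent u → InR s.parent v →
      (RootP (dsuUnion s x y).parent u = RootP (dsuUnion s x y).parent v ↔
        (RootP s.parent u = RootP s.parent v ∨
          ((RootP s.parent u = RootP s.parent x ∨ RootP s.parent u = RootP s.parent y) ∧
           (RootP s.parent v = RootP s.parent x ∨ RootP s.parent v = RootP s.parent y))))) := by
  obtain ⟨len1, val1, lvl1, bnd1, roots1, _, _, _⟩ :=
    find_spec lvl s.parent.length s.parent x hp hbd hx (hbd x hx)
  have hnl1 : NL (dsuFind s.parent.length s.parent x).1 s.isLand :=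
    NL_find s.parent s.isLand lvl s.parent.length x hp hbd hnl hx hlx (hbd x hx)
  set p1 := (dsuFind s.parent.length s.parent x).1 with hp1def
  have hInR1 : ∀ z, InR p1 z ↔ InR s.parent z := fun z => InR_len s.parent p1 len1 z
  have hy1 : InR p1 y := (hInR1 y).2 hy
  have hfuel2 : lvl y < p1.length := by rw [len1]; exact hbd y hy
  obtain ⟨len2, val2, lvl2, bnd2, roots2, _, _, _⟩ :=
    find_spec lvl p1.length p1 y lvl1 bnd1 hy1 hfuel2
  have hnl2 : NL (dsuFind p1.length p1 y).1 s.isLand :=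
    NL_find p1 s.isLand lvl p1.length y lvl1 bnd1 hnl1 hy1 hly hfuel2
  set p2 := (dsuFind p1.length p1 y).1 with hp2def
  have len2' : p2.length = s.parent.length := by rw [len2, len1]
  have hInR2 : ∀ z, InR p2 z ↔ InR s.parent z := fun z => InR_len s.parent p2 len2' z
  have roots12 : ∀ z, InR s.parent z → RootP p2 z = RootP s.parent z := by
    intro z hz
    rw [roots2 z ((hInR1 z).2 hz), roots1 z hz]
  set px := (dsuFind s.parent.length s.parent x).2 with hpxdef
  set py := (dsuFind p1.length p1 y).2 with hpydef
  have hpxv : px = RootP s.parent x := val1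
  have hpyv : py = RootP s.parent y := by
    rw [val2, roots1 y hy]
  have hpxInR : InR s.parent px := by rw [hpxv]; exact RootP_InR s.parent lvl hp x hx
  have hpyInR : InR s.parent py := by rw [hpyv]; exact RootP_InR s.parent lvl hp y hy
  have hpxroot : pvGetI p2 px = px := by
    have h1 := RootP_fix p2 lvl lvl2 bnd2 x ((hInR2 x).2 hx)
    rw [roots12 x hx, ← hpxv] at h1
    exact h1
  have hpyroot : pvGetI p2 py = py := by
    have h1 := RootP_fix p2 lvl lvl2 bnd2 y ((hInR2 y).2 hy)
    rw [roots12 y hy, ← hpyv] at h1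
    exact h1
  have hlandpx : pvGetB s.isLand px = true := by
    rw [hpxv]; exact land_root s.parent s.isLand lvl hp hnl x hx hlx
  have hlandpy : pvGetB s.isLand py = true := by
    rw [hpyv]; exact land_root s.parent s.isLand lvl hp hnl y hy hly
  have hU : dsuUnion s x y =
      (if px = py then { s with parent := p2 }
       else if pvGetI s.rank x > pvGetI s.rank y then
         { s with parent := pvSetI p2 py px, count := s.count - 1 }
       else if pvGetI s.rank y > pvGetI s.rank x then
         { s with parent := pvSetI p2 px py, count := s.count - 1 }
       else
         { s with parent := pvSetI p2 py px, rank := pvSetI s.rank px (pvGetI s.rank px + 1), count := s.count - 1 }) := rfl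
  by_cases hsame : px = py
  · rw [hU, if_pos hsame]
    refine ⟨len2', rfl, rfl, ?_, ⟨lvl, lvl2, bnd2⟩, hnl2, ?_⟩
    · have : RootP s.parent x = RootP s.parent y := by rw [← hpxv, ← hpyv, hsame]
      rw [if_pos this]
    · intro u v hu hv
      rw [roots12 u hu, roots12 v hv]
      have hxy : RootP s.parent x = RootP s.parent y := by rw [← hpxv, ← hpyv, hsame]
      omega
  · have hdiff : RootP s.parent x ≠ RootP s.parent y := by
      rw [← hpxv, ← hpyv]; exact hsame
    have main : ∀ (a b : Int), ((a = px ∧ b = py) ∨ (a = py ∧ b = px)) →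
        Wf (pvSetI p2 a b) ∧ NL (pvSetI p2 a b) s.isLand ∧
        (pvSetI p2 a b).length = s.parent.length ∧
        (∀ u v, InR s.parent u → InR s.parent v →
          (RootP (pvSetI p2 a b) u = RootP (pvSetI p2 a b) v ↔
            (RootP s.parent u = RootP s.parent v ∨
              ((RootP s.parent u = RootP s.parent x ∨ RootP s.parent u = RootP s.parent y) ∧
               (RootP s.parent v = RootP s.parent x ∨ RootP s.parent v = RootP s.parent y))))) := by
      intro a b hab
      have haInR : InR p2 a := by
        rcases hab with ⟨h, _⟩ | ⟨h, _⟩ <;> rw [h] <;>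
          [exact (hInR2 px).2 hpxInR; exact (hInR2 py).2 hpyInR]
      have hbInR : InR p2 b := by
        rcases hab with ⟨_, h⟩ | ⟨_, h⟩ <;> rw [h] <;>
          [exact (hInR2 py).2 hpyInR; exact (hInR2 px).2 hpxInR]
      have hroota : pvGetI p2 a = a := by
        rcases hab with ⟨h, _⟩ | ⟨h, _⟩ <;> rw [h] <;> [exact hpxroot; exact hpyroot]
      have hrootb : pvGetI p2 b = b := by
        rcases hab with ⟨_, h⟩ | ⟨_, h⟩ <;> rw [h] <;> [exact hpyroot; exact hpxroot]
      have hlanda : pvGetB s.isLand a = true := by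
        rcases hab with ⟨h, _⟩ | ⟨h, _⟩ <;> rw [h] <;> [exact hlandpx; exact hlandpy]
      have hlandb : pvGetB s.isLand b = true := by
        rcases hab with ⟨_, h⟩ | ⟨_, h⟩ <;> rw [h] <;> [exact hlandpy; exact hlandpx]
      have hbne : b ≠ a := by
        rcases hab with ⟨h1, h2⟩ | ⟨h1, h2⟩ <;> rw [h1, h2]
        · exact fun e => hsame e.symm
        · exact hsame
      obtain ⟨hwf, hnl3, hchar⟩ :=
        link_spec p2 lvl lvl2 bnd2 s.isLand hnl2 a b haInR hbInR hroota hrootb hbne hlanda hlandb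
      refine ⟨hwf, hnl3, by rw [length_pvSetI]; exact len2', ?_⟩
      intro u v hu hv
      rw [hchar u ((hInR2 u).2 hu), hchar v ((hInR2 v).2 hv), roots12 u hu, roots12 v hv]
      rw [ite_link_iff _ _ a b hbne]
      rcases hab with ⟨h1, h2⟩ | ⟨h1, h2⟩ <;> rw [h1, h2, hpxv, hpyv] <;> tauto
    rw [hU, if_neg hsame]
    by_cases hr1 : pvGetI s.rank x > pvGetI s.rank y
    · rw [if_pos hr1]
      obtain ⟨hwf, hnl3, hlen3, hiff⟩ := main py px (Or.inr ⟨rfl, rfl⟩)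
      exact ⟨hlen3, rfl, rfl, by rw [if_neg hdiff], hwf, hnl3, hiff⟩
    · rw [if_neg hr1]
      by_cases hr2 : pvGetI s.rank y > pvGetI s.rank x
      · rw [if_pos hr2]
        obtain ⟨hwf, hnl3, hlen3, hiff⟩ := main px py (Or.inl ⟨rfl, rfl⟩)
        exact ⟨hlen3, rfl, rfl, by rw [if_neg hdiff], hwf, hnl3, hiff⟩
      · rw [if_neg hr2]
        obtain ⟨hwf, hnl3, hlen3, hiff⟩ := main py px (Or.inr ⟨rfl, rfl⟩)
        exact ⟨hlen3, rfl, by rw [length_pvSetI], by rw [if_neg hdiff], hwf, hnl3, hiff⟩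

-- ---- Python's negative-index wraparound commutes with find and union ----

theorem dsuFind_root_any (f : Nat) (p : List Int) (w : Int) (h : pvGetI p w = w) :
    dsuFind f p w = (p, pvGetI p w) := by
  cases f with
  | zero => rfl
  | succ f => exact dsuFind_succ_root f p w h

theorem dsuFind_neg (p : List Int) (lvl : Int → Nat) (hp : LvlOk p lvl) (hbd : Bnd p lvl)
    (x : Int) (hx : -(p.length : Int) ≤ x ∧ x < 0) :
    dsuFind p.length p x = dsuFind p.length p (x + p.length) := by
  obtain ⟨f, hf⟩ : ∃ f, p.length = f + 1 := ⟨p.length - 1, by omega⟩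
  suffices H : ∀ w : Int, w = x + (p.length : Int) →
      dsuFind p.length p x = dsuFind p.length p w from H _ rfl
  intro w hwdef
  have hw : InR p w := by unfold InR; omega
  have hget : pvGetI p x = pvGetI p w := by rw [hwdef]; exact pvGetI_neg p x hx
  have hxnw : x ≠ w := by omega
  rw [hf]
  by_cases hroot : pvGetI p w = w
  · rw [dsuFind_succ_root f p w hroot,
      dsuFind_succ_step f p x (by rw [hget, hroot]; exact Ne.symm hxnw)]
    have hrec : dsuFind f p (pvGetI p x) = (p, w) := by
      rw [hget, hroot, dsuFind_root_any f p w hroot, hroot]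
    rw [hrec]
    have hnoop : pvSetI p x w = p := by
      rw [pvSetI_neg p x w hx, ← hwdef]
      have h2 := pvSetI_noop p w hw
      rw [hroot] at h2
      exact h2
    rw [hnoop, hget]
  · have hlt : lvl (pvGetI p w) < lvl w := lvl_step_lt p lvl hp w hw hroot
    have hfw : lvl w < p.length := hbd w hw
    obtain ⟨len1, _, _, _, _, _, _, _⟩ :=
      find_spec lvl f p (pvGetI p w) hp hbd (hp w hw).1 (by omega)
    have hxne : x ≠ pvGetI p x := by
      have h1 := (hp w hw).1
      rw [hget]
      unfold InR at h1
      omega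
    rw [dsuFind_succ_step f p w hroot, dsuFind_succ_step f p x (fun e => hxne e.symm)]
    rw [hget]
    have hset : pvSetI (dsuFind f p (pvGetI p w)).1 x (dsuFind f p (pvGetI p w)).2 =
        pvSetI (dsuFind f p (pvGetI p w)).1 w (dsuFind f p (pvGetI p w)).2 := by
      rw [pvSetI_neg _ x _ (by rw [len1]; exact hx), len1, ← hwdef]
    rw [hset]
    have hget2 : pvGetI (pvSetI (dsuFind f p (pvGetI p w)).1 w (dsuFind f p (pvGetI p w)).2) x
        = pvGetI (pvSetI (dsuFind f p (pvGetI p w)).1 w (dsuFind f p (pvGetI p w)).2) w := by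
      rw [pvGetI_neg _ x (by rw [length_pvSetI, len1]; exact hx), length_pvSetI, len1, ← hwdef]
    rw [hget2]

theorem dsuUnion_eq (s : DSU) (x y : Int) :
    dsuUnion s x y =
      (let f1 := dsuFind s.parent.length s.parent x
       let px := f1.2
       let f2 := dsuFind f1.1.length f1.1 y
       let p2 := f2.1
       let py := f2.2
       let rx := pvGetI s.rank x
       let ry := pvGetI s.rank y
       if px = py then { s with parent := p2 }
       else if rx > ry then { s with parent := pvSetI p2 py px, count := s.count - 1 }
       else if ry > rx then { s with parent := pvSetI p2 px py, count := s.count - 1 }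
       else
         { s with parent := pvSetI p2 py px, rank := pvSetI s.rank px (pvGetI s.rank px + 1), count := s.count - 1 }) := rfl

theorem dsuUnion_neg (s : DSU) (x y : Int) (lvl : Int → Nat)
    (hp : LvlOk s.parent lvl) (hbd : Bnd s.parent lvl)
    (hrk : s.rank.length = s.parent.length)
    (hx : -(s.parent.length : Int) ≤ x ∧ x < 0) :
    dsuUnion s x y = dsuUnion s (x + s.parent.length) y := by
  have e1 : dsuFind s.parent.length s.parent x =
      dsuFind s.parent.length s.parent (x + s.parent.length) :=
    dsuFind_neg s.parent lvl hp hbd x hx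
  have e2 : pvGetI s.rank x = pvGetI s.rank (x + s.parent.length) := by
    have := pvGetI_neg s.rank x (by rw [hrk]; exact hx)
    rw [hrk] at this
    exact this
  rw [dsuUnion_eq s x y, dsuUnion_eq s (x + s.parent.length) y, e1, e2]

-- flat cell indices: a coordinate pair inside the grid yields an index in [0, rows*cols)
def InN (rows cols z : Int) : Prop := 0 ≤ z ∧ z < rows * cols

theorem idx_bounds (rows cols : Int) (c : Int × Int)
    (h : 0 ≤ c.1 ∧ c.1 < rows ∧ 0 ≤ c.2 ∧ c.2 < cols) :
    InN rows cols (c.1 * cols + c.2) := by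
  obtain ⟨h1, h2, h3, h4⟩ := h
  unfold InN
  constructor
  · have : 0 ≤ c.1 * cols := mul_nonneg h1 (by omega)
    omega
  · have : c.1 * cols ≤ (rows - 1) * cols :=
      mul_le_mul_of_nonneg_right (by omega) (by omega)
    nlinarith

-- ---- the relabelling pass of B: scanning all n slots = mapping over the array ----

def fRel (c cur : Int) : Option Int → Option Int := fun o => if o = some c then some cur else o

theorem fRel_none (c cur : Int) : fRel c cur none = none := by
  unfold fRel
  rw [if_neg (by simp)]

theorem pvGetO_append_mid (u t : List (Option Int)) (h : Option Int) :
    pvGetO (u ++ h :: t) (u.length : Int) = h := by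
  unfold pvGetO
  rw [dif_pos ⟨by omega, by simp⟩]
  simp

theorem set_append_mid (u t : List (Option Int)) (h v : Option Int) :
    (u ++ h :: t).set u.length v = u ++ v :: t := by
  induction u with
  | nil => rfl
  | cons a u ih => simp [List.set, ih]

theorem pvSetO_append_mid (u t : List (Option Int)) (h v : Option Int) :
    pvSetO (u ++ h :: t) (u.length : Int) v = u ++ v :: t := by
  unfold pvSetO
  rw [if_pos ⟨by omega, by simp⟩]
  simpa using set_append_mid u t h v

theorem relabel_go (c cur : Int) : ∀ (l2 l1 : List (Option Int)),
    (PySem.List.pyRange (l1.length : Int) ((l1.length : Int) + (l2.length : Int)) 1).foldl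
      (fun lab k => if pvGetO lab k = some c then pvSetO lab k (some cur) else lab)
      (l1.map (fRel c cur) ++ l2) = (l1 ++ l2).map (fRel c cur) := by
  intro l2
  induction l2 with
  | nil =>
    intro l1
    rw [PySem.List.pyRange_one_eq_nil (by simp)]
    simp
  | cons h t ih =>
    intro l1
    rw [PySem.List.pyRange_one_cons (by simp), List.foldl_cons]
    have hu : ((l1.map (fRel c cur)).length : Int) = (l1.length : Int) := by simp
    have hget : pvGetO (l1.map (fRel c cur) ++ h :: t) (l1.length : Int) = h := by
      rw [← hu]; exact pvGetO_append_mid (l1.map (fRel c cur)) t h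
    have hstep :
        (if pvGetO (l1.map (fRel c cur) ++ h :: t) (l1.length : Int) = some c then
          pvSetO (l1.map (fRel c cur) ++ h :: t) (l1.length : Int) (some cur)
        else l1.map (fRel c cur) ++ h :: t) = (l1 ++ [h]).map (fRel c cur) ++ t := by
      rw [hget]
      by_cases hc : h = some c
      · rw [if_pos hc, ← hu, pvSetO_append_mid]
        have : fRel c cur h = some cur := by unfold fRel; rw [if_pos hc]
        simp [this]
      · rw [if_neg hc]
        have : fRel c cur h = h := by unfold fRel; rw [if_neg hc]
        simp [this]
    rw [hstep]
    have hlen1 : (((l1 ++ [h]).length : Int)) = (l1.length : Int) + 1 := by simp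
    have hrange : PySem.List.pyRange ((l1.length : Int) + 1)
        ((l1.length : Int) + ((h :: t).length : Int)) 1 =
        PySem.List.pyRange (((l1 ++ [h]).length : Int))
          (((l1 ++ [h]).length : Int) + (t.length : Int)) 1 := by
      rw [hlen1]
      congr 1
      simp
      omega
    rw [hrange]
    have := ih (l1 ++ [h])
    rw [this]
    simp

theorem relabelR_eq_map (n c cur : Int) (l : List (Option Int)) (hl : (l.length : Int) = n) :
    (PySem.List.pyRange 0 n 1).foldl
      (fun lab k => if pvGetO lab k = some c then pvSetO lab k (some cur) else lab) l =
    l.map (fRel c cur) := by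
  have h0 : ((([] : List (Option Int)).length : Int)) = 0 := by simp
  have := relabel_go c cur l []
  simp only [List.nil_append, List.map_nil, List.length_nil, Nat.cast_zero, zero_add] at this
  rw [← hl]
  exact this

-- ---- the merged-label relation driven by the list M of already-met neighbour labels ----

def Touch (M : List Int) (cur : Int) (o : Option Int) : Prop :=
  o = some cur ∨ ∃ m ∈ M, o = some m

def ReqM (M : List Int) (cur : Int) (o1 o2 : Option Int) : Prop :=
  o1 = o2 ∨ (Touch M cur o1 ∧ Touch M cur o2)

theorem Touch_nil (cur : Int) (o : Option Int) : Touch [] cur o ↔ o = some cur := by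
  unfold Touch; simp

theorem ReqM_nil (cur : Int) (o1 o2 : Option Int) : ReqM [] cur o1 o2 ↔ o1 = o2 := by
  unfold ReqM
  rw [Touch_nil, Touch_nil]
  constructor
  · rintro (h | ⟨h1, h2⟩)
    · exact h
    · rw [h1, h2]
  · exact Or.inl

theorem Touch_append (M : List Int) (cur c : Int) (o : Option Int) :
    Touch (M ++ [c]) cur o ↔ Touch M cur o ∨ o = some c := by
  unfold Touch
  simp only [List.mem_append, List.mem_singleton]
  constructor
  · rintro (h | ⟨m, hm | hm, ho⟩)
    · exact Or.inl (Or.inl h)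
    · exact Or.inl (Or.inr ⟨m, hm, ho⟩)
    · subst hm; exact Or.inr ho
  · rintro ((h | ⟨m, hm, ho⟩) | h)
    · exact Or.inl h
    · exact Or.inr ⟨m, Or.inl hm, ho⟩
    · exact Or.inr ⟨c, Or.inr rfl, h⟩

theorem Touch_some_cur (M : List Int) (cur : Int) : Touch M cur (some cur) := Or.inl rfl

theorem ReqM_cur_iff (M : List Int) (cur c : Int) :
    ReqM M cur (some cur) (some c) ↔ (c = cur ∨ c ∈ M) := by
  unfold ReqM Touch
  constructor
  · rintro (h | ⟨_, h2 | ⟨m, hm, ho⟩⟩)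
    · left; exact (Option.some_inj.1 h).symm
    · left; exact Option.some_inj.1 h2
    · right; rw [Option.some_inj.1 ho]; exact hm
  · rintro (h | h)
    · left; rw [h]
    · exact Or.inr ⟨Or.inl rfl, Or.inr ⟨c, h, rfl⟩⟩

-- ---- the relabelling fold of B over the met-labels list ----

def relStep (n cur : Int) (lc : List (Option Int) × Int) (c : Int) :
    List (Option Int) × Int :=
  if c ≠ cur then
    ((PySem.List.pyRange 0 n 1).foldl (fun lab k =>
        if pvGetO lab k = some c then pvSetO lab k (some cur) else lab) lc.1,
     lc.2 - 1)
  else lc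

def relFold (n cur : Int) (M : List Int) (lc : List (Option Int) × Int) :
    List (Option Int) × Int :=
  M.foldl (relStep n cur) lc

def gRel (M : List Int) (cur : Int) (v : Int) : Int := if v ∈ M ∧ v ≠ cur then cur else v

theorem relFold_spec (n cur : Int) : ∀ (M : List Int) (lc : List (Option Int) × Int),
    ((lc.1.length : Int) = n) →
    ((relFold n cur M lc).1.length : Int) = n ∧
    (∀ z, pvGetO (relFold n cur M lc).1 z = (pvGetO lc.1 z).map (gRel M cur)) ∧
    (relFold n cur M lc).2 = lc.2 - ((M.filter (fun c => decide (c ≠ cur))).length : Int) := by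
  intro M
  induction M with
  | nil =>
    intro lc hl
    refine ⟨hl, ?_, by simp [relFold]⟩
    intro z
    show pvGetO lc.1 z = _
    cases h : pvGetO lc.1 z <;> simp [gRel]
  | cons m M' ih =>
    intro lc hl
    by_cases hm : m = cur
    · have h1 : relFold n cur (m :: M') lc = relFold n cur M' lc := by
        unfold relFold
        rw [List.foldl_cons]
        unfold relStep
        rw [if_neg (by simpa using hm)]
      obtain ⟨ihl, ihget, ihsnd⟩ := ih lc hl
      rw [h1]
      refine ⟨ihl, ?_, ?_⟩
      · intro z
        rw [ihget z]
        cases h : pvGetO lc.1 z with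
        | none => rfl
        | some v =>
          simp only [Option.map_some, Option.some_inj]
          unfold gRel
          by_cases hvc : v = cur
          · simp [hvc]
          · simp [List.mem_cons, hvc, hm]
      · rw [ihsnd, List.filter_cons]
        simp [hm]
    · have h1 : relFold n cur (m :: M') lc =
          relFold n cur M' (lc.1.map (fRel m cur), lc.2 - 1) := by
        unfold relFold
        rw [List.foldl_cons]
        unfold relStep
        rw [if_pos (by simpa using hm), relabelR_eq_map n m cur lc.1 hl]
      have hl' : (((lc.1.map (fRel m cur)).length : Int)) = n := by simpa using hl
      obtain ⟨ihl, ihget, ihsnd⟩ := ih (lc.1.map (fRel m cur), lc.2 - 1) hl'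
      rw [h1]
      refine ⟨ihl, ?_, ?_⟩
      · intro z
        rw [ihget z]
        show ((pvGetO (lc.1.map (fRel m cur)) z).map (gRel M' cur)) = _
        rw [pvGetO_map lc.1 (fRel m cur) (fRel_none m cur) z]
        cases h : pvGetO lc.1 z with
        | none => simp [fRel_none]
        | some v =>
          have : fRel m cur (some v) = some (if v = m then cur else v) := by
            unfold fRel
            by_cases hvm : v = m
            · simp [hvm]
            · simp [hvm]
          rw [this]
          simp only [Option.map_some, Option.some_inj]
          unfold gRel
          by_cases hvm : v = m
          · have hvc : v ≠ cur := by rw [hvm]; exact hm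
            simp only [if_pos hvm]
            rw [if_neg (by simp), if_pos ⟨by simp [hvm], hvc⟩]
          · rw [if_neg hvm]
            by_cases hmem : v ∈ M' ∧ v ≠ cur
            · rw [if_pos hmem, if_pos ⟨List.mem_cons_of_mem m hmem.1, hmem.2⟩]
            · rw [if_neg hmem, if_neg (by
                intro ⟨hin, hne⟩
                rcases List.mem_cons.1 hin with h' | h'
                · exact hvm h'
                · exact hmem ⟨h', hne⟩)]
      · rw [ihsnd, List.filter_cons]
        simp only [ne_eq, decide_not]
        rw [if_pos (by simpa using hm)]
        simp only [List.length_cons]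
        push_cast
        ring

-- every value stored after the relabelling pass is cur or was already stored there
theorem relFold_val (n cur : Int) (M : List Int) (lc : List (Option Int) × Int)
    (hl : (lc.1.length : Int) = n) (z v : Int)
    (h : pvGetO (relFold n cur M lc).1 z = some v) :
    v = cur ∨ pvGetO lc.1 z = some v := by
  obtain ⟨_, hget, _⟩ := relFold_spec n cur M lc hl
  rw [hget z] at h
  cases h0 : pvGetO lc.1 z with
  | none => rw [h0] at h; cases h
  | some v0 =>
    rw [h0] at h
    simp only [Option.map_some, Option.some_inj] at h
    unfold gRel at h
    by_cases hc : v0 ∈ M ∧ v0 ≠ cur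
    · rw [if_pos hc] at h; exact Or.inl h.symm
    · rw [if_neg hc] at h
      right
      rw [← h]

-- ---- the loop bodies of the two ports, as named functions (definitionally equal to the lambdas) ----

def stepUC (rows cols current : Int) (s : DSU) (q : Int × Int) : DSU :=
  if 0 ≤ q.1 ∧ q.1 < rows ∧ 0 ≤ q.2 ∧ q.2 < cols ∧
      pvGetB s.isLand (q.1 * cols + q.2) = true then
    dsuUnion s current (q.1 * cols + q.2)
  else s

def stepN (rows cols : Int) (label1 : List (Option Int)) (acc : List Int)
    (q : Int × Int) : List Int :=
  if 0 ≤ q.1 ∧ q.1 < rows ∧ 0 ≤ q.2 ∧ q.2 < cols then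
    match pvGetO label1 (q.1 * cols + q.2) with
    | some c => if c ∈ acc then acc else acc ++ [c]
    | none => acc
  else acc

theorem ReqM_some_cur_iff (M : List Int) (cur : Int) (o : Option Int) :
    ReqM M cur o (some cur) ↔ Touch M cur o := by
  unfold ReqM
  constructor
  · rintro (h | ⟨h1, _⟩)
    · exact Or.inl h
    · exact h1
  · intro h; exact Or.inr ⟨h, Touch_some_cur M cur⟩

theorem ReqM_some_mem (M : List Int) (cur c : Int) (hc : c = cur ∨ c ∈ M) (o : Option Int) :
    ReqM M cur o (some c) ↔ Touch M cur o := by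
  have htc : Touch M cur (some c) := by
    rcases hc with h | h
    · rw [h]; exact Touch_some_cur M cur
    · exact Or.inr ⟨c, h, rfl⟩
  unfold ReqM
  constructor
  · rintro (h | ⟨h1, _⟩)
    · rw [h]; exact htc
    · exact h1
  · intro h; exact Or.inr ⟨h, htc⟩

theorem Touch_fresh (M : List Int) (cur c : Int) (hc : c ∉ M) (hcc : c ≠ cur) :
    ¬ Touch M cur (some c) := by
  rintro (h | ⟨m, hm, ho⟩)
  · exact hcc (Option.some_inj.1 h)
  · rw [Option.some_inj.1 ho] at hc; exact hc hm

theorem ReqM_some_fresh (M : List Int) (cur c : Int) (hc : c ∉ M) (hcc : c ≠ cur)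
    (o : Option Int) : ReqM M cur o (some c) ↔ o = some c := by
  unfold ReqM
  constructor
  · rintro (h | ⟨_, h2⟩)
    · exact h
    · exact absurd h2 (Touch_fresh M cur c hc hcc)
  · exact Or.inl

theorem merge_logic_same (M : List Int) (cur c : Int) (hc : c = cur ∨ c ∈ M)
    (o1 o2 : Option Int) :
    (ReqM M cur o1 o2 ∨
      ((ReqM M cur o1 (some cur) ∨ ReqM M cur o1 (some c)) ∧
       (ReqM M cur o2 (some cur) ∨ ReqM M cur o2 (some c)))) ↔ ReqM M cur o1 o2 := by
  rw [ReqM_some_cur_iff, ReqM_some_cur_iff, ReqM_some_mem M cur c hc, ReqM_some_mem M cur c hc]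
  unfold ReqM
  tauto

theorem merge_logic_fresh (M : List Int) (cur c : Int) (hc : c ∉ M) (hcc : c ≠ cur)
    (o1 o2 : Option Int) :
    (ReqM M cur o1 o2 ∨
      ((ReqM M cur o1 (some cur) ∨ ReqM M cur o1 (some c)) ∧
       (ReqM M cur o2 (some cur) ∨ ReqM M cur o2 (some c)))) ↔ ReqM (M ++ [c]) cur o1 o2 := by
  rw [ReqM_some_cur_iff, ReqM_some_cur_iff, ReqM_some_fresh M cur c hc hcc,
    ReqM_some_fresh M cur c hc hcc]
  unfold ReqM
  rw [Touch_append, Touch_append]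
  have h1 : o1 = some c → o2 = some c → o1 = o2 := by intro a b; rw [a, b]
  tauto

theorem ReqM_append_cur (M : List Int) (cur : Int) (o1 o2 : Option Int) :
    ReqM (M ++ [cur]) cur o1 o2 ↔ ReqM M cur o1 o2 := by
  unfold ReqM
  rw [Touch_append, Touch_append]
  have : ∀ o : Option Int, o = some cur → Touch M cur o := fun o h => Or.inl h
  tauto

-- ---- the invariant tying the union-find state to the label array during one position's
-- ---- neighbour loop (M = labels of the in-grid land neighbours met so far) ----

def Inv2 (rows cols i cur cnt1 : Int) (label1 : List (Option Int)) (t : DSU) (M : List Int) :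
    Prop :=
  t.parent.length = (rows * cols).toNat ∧
  t.isLand.length = t.parent.length ∧
  t.rank.length = t.parent.length ∧
  Wf t.parent ∧
  NL t.parent t.isLand ∧
  t.count = cnt1 - ((M.filter (fun c => decide (c ≠ cur))).length : Int) ∧
  pvGetB t.isLand i = true ∧
  (∀ z, InN rows cols z → (pvGetB t.isLand z = true ↔ (pvGetO label1 z).isSome = true)) ∧
  (∀ z w, InN rows cols z → InN rows cols w →
    pvGetB t.isLand z = true → pvGetB t.isLand w = true →
    (RootP t.parent z = RootP t.parent w ↔
      ReqM M cur (pvGetO label1 z) (pvGetO label1 w)))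

theorem phase2_step (rows cols c0 i cur cnt1 : Int) (label1 : List (Option Int))
    (hc0 : -(rows * cols) ≤ c0 ∧ c0 < rows * cols)
    (hi : i = if 0 ≤ c0 then c0 else c0 + rows * cols)
    (hiN : InN rows cols i)
    (hcur : pvGetO label1 i = some cur)
    (q : Int × Int) (t : DSU) (M : List Int)
    (hI : Inv2 rows cols i cur cnt1 label1 t M) (hnd : M.Nodup) :
    Inv2 rows cols i cur cnt1 label1 (stepUC rows cols c0 t q)
      (stepN rows cols label1 M q) ∧ (stepN rows cols label1 M q).Nodup := by
  obtain ⟨hlen, hllen, hrklen, hwf, hnl, hcnt, hlandxy, hiso, hroots⟩ := hI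
  have hn : ((rows * cols).toNat : Int) = rows * cols := by
    obtain ⟨a1, a2⟩ := hiN
    omega
  by_cases hb : 0 ≤ q.1 ∧ q.1 < rows ∧ 0 ≤ q.2 ∧ q.2 < cols
  · have hjN : InN rows cols (q.1 * cols + q.2) := idx_bounds rows cols q hb
    by_cases hland : pvGetB t.isLand (q.1 * cols + q.2) = true
    · have hA : stepUC rows cols c0 t q = dsuUnion t c0 (q.1 * cols + q.2) := by
        unfold stepUC
        rw [if_pos ⟨hb.1, hb.2.1, hb.2.2.1, hb.2.2.2, hland⟩]
      obtain ⟨c, hc⟩ : ∃ c, pvGetO label1 (q.1 * cols + q.2) = some c := by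
        have h1 := (hiso _ hjN).1 hland
        cases h : pvGetO label1 (q.1 * cols + q.2)
        · rw [h] at h1; cases h1
        · exact ⟨_, rfl⟩
      have hB : stepN rows cols label1 M q = if c ∈ M then M else M ++ [c] := by
        unfold stepN
        rw [if_pos hb, hc]
      obtain ⟨lvl, hlok, hbnd⟩ := hwf
      have hUneg : dsuUnion t c0 (q.1 * cols + q.2) = dsuUnion t i (q.1 * cols + q.2) := by
        by_cases h0 : 0 ≤ c0
        · rw [hi, if_pos h0]
        · have he := dsuUnion_neg t c0 (q.1 * cols + q.2) lvl hlok hbnd hrklen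
            (by rw [hlen, hn]; omega)
          rw [he, hlen, hn, hi, if_neg h0]
      have hcurR : InR t.parent i := by
        unfold InR InN at *
        rw [hlen]
        omega
      have hneiR : InR t.parent (q.1 * cols + q.2) := by
        unfold InR InN at *
        rw [hlen]
        omega
      obtain ⟨ulen, uland, urk, ucnt, uwf, unl, uiff⟩ :=
        union_spec t i (q.1 * cols + q.2) lvl hlok hbnd hnl hcurR hneiR hlandxy hland
      have hRiff : (RootP t.parent i = RootP t.parent (q.1 * cols + q.2)) ↔
          (c = cur ∨ c ∈ M) := by
        have h1 := hroots i (q.1 * cols + q.2) hiN hjN hlandxy hland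
        rw [hcur, hc] at h1
        rw [h1]
        exact ReqM_cur_iff M cur c
      rw [hA, hB, hUneg]
      set t' := dsuUnion t i (q.1 * cols + q.2) with ht'
      have hcnt' : t'.count =
          cnt1 - (((if c ∈ M then M else M ++ [c]).filter
            (fun c => decide (c ≠ cur))).length : Int) := by
        rw [ucnt]
        by_cases hcc : c = cur ∨ c ∈ M
        · rw [if_pos (hRiff.2 hcc)]
          by_cases hmem : c ∈ M
          · rw [if_pos hmem]; exact hcnt
          · rw [if_neg hmem]
            have hceq : c = cur := by tauto
            rw [List.filter_append]
            simp [hceq, hcnt]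
        · push_neg at hcc
          have hnr : ¬(RootP t.parent i = RootP t.parent (q.1 * cols + q.2)) := by
            intro h
            rcases hRiff.1 h with h1 | h1
            · exact hcc.1 h1
            · exact hcc.2 h1
          rw [if_neg hnr, if_neg hcc.2, List.filter_append]
          have : (List.filter (fun c => decide (c ≠ cur)) [c]).length = 1 := by
            simp [hcc.1]
          rw [List.length_append, this, hcnt]
          push_cast
          ring
      have hIn : ∀ z, InN rows cols z → InR t.parent z := by
        intro z hz
        unfold InR InN at *
        rw [hlen]
        omega
      refine ⟨⟨by rw [ulen, hlen], by rw [uland, ulen]; exact hllen,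
        by rw [urk, ulen]; exact hrklen, uwf,
        by rw [uland]; exact unl, hcnt', by rw [uland]; exact hlandxy,
        by intro z hz; rw [uland]; exact hiso z hz, ?_⟩, ?_⟩
      · intro z w hz hw hlz hlw
        rw [uland] at hlz hlw
        have h1 := uiff z w (hIn z hz) (hIn w hw)
        rw [h1]
        have he1 := hroots z w hz hw hlz hlw
        have he2 := hroots z i hz hiN hlz hlandxy
        rw [hcur] at he2
        have he3 := hroots z (q.1 * cols + q.2) hz hjN hlz hland
        rw [hc] at he3
        have hf2 := hroots w i hw hiN hlw hlandxy
        rw [hcur] at hf2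
        have hf3 := hroots w (q.1 * cols + q.2) hw hjN hlw hland
        rw [hc] at hf3
        rw [he1, he2, he3, hf2, hf3]
        by_cases hmem : c ∈ M
        · rw [if_pos hmem]
          exact merge_logic_same M cur c (Or.inr hmem) _ _
        · rw [if_neg hmem]
          by_cases hceq : c = cur
          · subst hceq
            rw [ReqM_append_cur]
            exact merge_logic_same M c c (Or.inl rfl) _ _
          · exact merge_logic_fresh M cur c hmem hceq _ _
      · by_cases hmem : c ∈ M
        · rw [if_pos hmem]; exact hnd
        · rw [if_neg hmem]
          rw [List.nodup_append]
          refine ⟨hnd, List.nodup_singleton c, ?_⟩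
          intro a ha b hbm
          rw [List.mem_singleton] at hbm
          subst hbm
          exact fun heq => hmem (heq ▸ ha)
    · have hA : stepUC rows cols c0 t q = t := by
        unfold stepUC
        rw [if_neg (fun h => hland h.2.2.2.2)]
      have hB : stepN rows cols label1 M q = M := by
        unfold stepN
        have h1 : pvGetO label1 (q.1 * cols + q.2) = none := by
          cases h : pvGetO label1 (q.1 * cols + q.2) with
          | none => rfl
          | some v =>
            exfalso
            have := (hiso _ hjN).2 (by rw [h]; rfl)
            exact hland this
        rw [if_pos hb, h1]
      rw [hA, hB]
      exact ⟨⟨hlen, hllen, hrklen, hwf, hnl, hcnt, hlandxy, hiso, hroots⟩, hnd⟩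
  · have hA : stepUC rows cols c0 t q = t := by
      unfold stepUC
      rw [if_neg (fun h => hb ⟨h.1, h.2.1, h.2.2.1, h.2.2.2.1⟩)]
    have hB : stepN rows cols label1 M q = M := by
      unfold stepN
      rw [if_neg hb]
    rw [hA, hB]
    exact ⟨⟨hlen, hllen, hrklen, hwf, hnl, hcnt, hlandxy, hiso, hroots⟩, hnd⟩

theorem phase2 (rows cols c0 i cur cnt1 : Int) (label1 : List (Option Int))
    (hc0 : -(rows * cols) ≤ c0 ∧ c0 < rows * cols)
    (hi : i = if 0 ≤ c0 then c0 else c0 + rows * cols)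
    (hiN : InN rows cols i)
    (hcur : pvGetO label1 i = some cur) :
    ∀ (qs : List (Int × Int)) (t : DSU) (M : List Int),
      Inv2 rows cols i cur cnt1 label1 t M → M.Nodup →
      Inv2 rows cols i cur cnt1 label1 (qs.foldl (stepUC rows cols c0) t)
          (qs.foldl (stepN rows cols label1) M) ∧
        (qs.foldl (stepN rows cols label1) M).Nodup := by
  intro qs
  induction qs with
  | nil => intro t M hI hnd; exact ⟨hI, hnd⟩
  | cons q qs ih =>
    intro t M hI hnd
    rw [List.foldl_cons, List.foldl_cons]
    obtain ⟨h1, h2⟩ := phase2_step rows cols c0 i cur cnt1 label1 hc0 hi hiN hcur q t M hI hnd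
    exact ih _ _ h1 h2

-- ---- the main relational invariant between the two port states ----

def RelAB (rows cols : Int) (s : DSU) (label : List (Option Int)) (nextId cnt : Int) : Prop :=
  s.parent.length = (rows * cols).toNat ∧
  s.isLand.length = s.parent.length ∧
  s.rank.length = s.parent.length ∧
  label.length = s.parent.length ∧
  Wf s.parent ∧
  NL s.parent s.isLand ∧
  s.count = cnt ∧
  (∀ z, InN rows cols z → (pvGetB s.isLand z = true ↔ (pvGetO label z).isSome = true)) ∧
  (∀ z w, InN rows cols z → InN rows cols w →
    pvGetB s.isLand z = true → pvGetB s.isLand w = true →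
    (RootP s.parent z = RootP s.parent w ↔ pvGetO label z = pvGetO label w)) ∧
  (∀ z v, pvGetO label z = some v → v < nextId)

theorem Touch_some (M : List Int) (cur v : Int) :
    Touch M cur (some v) ↔ (v = cur ∨ v ∈ M) := by
  unfold Touch
  constructor
  · rintro (h | ⟨m, hm, ho⟩)
    · exact Or.inl (Option.some_inj.1 h)
    · right; rw [Option.some_inj.1 ho]; exact hm
  · rintro (h | h)
    · left; rw [h]
    · exact Or.inr ⟨v, h, rfl⟩

theorem gRel_of_touch (M : List Int) (cur v : Int) (h : v = cur ∨ v ∈ M) :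
    gRel M cur v = cur := by
  unfold gRel
  by_cases hvc : v = cur
  · rw [if_neg (fun hh => hh.2 hvc), hvc]
  · rcases h with h | h
    · exact absurd h hvc
    · rw [if_pos ⟨h, hvc⟩]

theorem gRel_of_free (M : List Int) (cur v : Int) (h : ¬(v = cur ∨ v ∈ M)) :
    gRel M cur v = v := by
  unfold gRel
  rw [if_neg (fun hh => h (Or.inr hh.1))]

theorem ReqM_iff_gRel (M : List Int) (cur v1 v2 : Int) :
    ReqM M cur (some v1) (some v2) ↔ gRel M cur v1 = gRel M cur v2 := by
  unfold ReqM
  rw [Touch_some, Touch_some]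
  constructor
  · rintro (h | ⟨h1, h2⟩)
    · rw [Option.some_inj.1 h]
    · rw [gRel_of_touch M cur v1 h1, gRel_of_touch M cur v2 h2]
  · intro h
    by_cases t1 : v1 = cur ∨ v1 ∈ M <;> by_cases t2 : v2 = cur ∨ v2 ∈ M
    · exact Or.inr ⟨t1, t2⟩
    · rw [gRel_of_touch M cur v1 t1, gRel_of_free M cur v2 t2] at h
      exact absurd (Or.inl h.symm) t2
    · rw [gRel_of_free M cur v1 t1, gRel_of_touch M cur v2 t2] at h
      exact absurd (Or.inl h) t1
    · rw [gRel_of_free M cur v1 t1, gRel_of_free M cur v2 t2] at h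
      exact Or.inl (by rw [h])

-- phase 1 of a position: mark the (flattened) cell as land; establishes the loop
-- invariant with M = []
theorem phase1 (rows cols i : Int) (hiN : InN rows cols i) (s : DSU)
    (label : List (Option Int)) (nextId cnt : Int)
    (hR : RelAB rows cols s label nextId cnt) (cur : Int) (label1 : List (Option Int))
    (next1 : Int)
    (hcase : (pvGetO label i = some cur ∧ label1 = label ∧ next1 = nextId) ∨
      (pvGetO label i = none ∧ cur = nextId ∧
        label1 = pvSetO label i (some nextId) ∧ next1 = nextId + 1)) :
    Inv2 rows cols i cur (cnt + 1) label1
      { s with isLand := pvSetB s.isLand i true, count := s.count + 1 } [] ∧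
    pvGetO label1 i = some cur ∧
    (∀ z v, pvGetO label1 z = some v → v < next1) ∧ cur < next1 ∧
    label1.length = label.length := by
  obtain ⟨hlen, hllen, hrklen, hlablen, hwf, hnl, hcnt, hiso, hroots, hvb⟩ := hR
  have hn : ((rows * cols).toNat : Int) = rows * cols := by
    obtain ⟨a1, a2⟩ := hiN
    omega
  have hcurB : InR s.isLand i := by
    unfold InR InN at *
    rw [hllen, hlen]
    omega
  have hInRlab : InR label i := by
    unfold InR InN at *
    rw [hlablen, hlen]
    omega
  have hland1 : ∀ z, InN rows cols z →
      (pvGetB (pvSetB s.isLand i true) z = true ↔ (z = i ∨ pvGetB s.isLand z = true)) := by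
    intro z hz
    by_cases hzx : z = i
    · subst hzx
      rw [pvGetB_set_self s.isLand _ true hcurB]
      simp
    · rw [pvGetB_set_ne s.isLand i true z hcurB hz.1 hzx]
      simp [hzx]
  have hlab1 : ∀ z, 0 ≤ z → z ≠ i → pvGetO label1 z = pvGetO label z := by
    intro z hz0 hz
    rcases hcase with ⟨_, h1, _⟩ | ⟨_, _, h1, _⟩
    · rw [h1]
    · rw [h1]
      exact pvGetO_set_ne label i (some nextId) z hInRlab hz0 hz
  have hlabxy : pvGetO label1 i = some cur := by
    rcases hcase with ⟨h0, h1, _⟩ | ⟨h0, h2, h1, _⟩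
    · rw [h1]; exact h0
    · rw [h1, pvGetO_set_self label i (some nextId) hInRlab, h2]
  have hNL1 : NL s.parent (pvSetB s.isLand i true) := by
    intro z hz hzland
    have hzx : z ≠ i := by
      intro e
      rw [e, pvGetB_set_self s.isLand _ true hcurB] at hzland
      cases hzland
    rw [pvGetB_set_ne s.isLand i true z hcurB hz.1 hzx] at hzland
    exact hnl z hz hzland
  refine ⟨⟨hlen, by rw [length_pvSetB]; exact hllen, hrklen, hwf, hNL1, by simp [hcnt],
    ?_, ?_, ?_⟩, hlabxy, ?_, ?_, ?_⟩
  · show pvGetB (pvSetB s.isLand i true) i = true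
    exact pvGetB_set_self s.isLand _ true hcurB
  · intro z hz
    rw [hland1 z hz]
    by_cases hzx : z = i
    · subst hzx
      rw [hlabxy]
      simp
    · rw [hlab1 z hz.1 hzx]
      rw [← hiso z hz]
      simp [hzx]
  · intro z w hz hw hlz hlw
    rw [ReqM_nil]
    change RootP s.parent z = RootP s.parent w ↔ _
    rw [hland1 z hz] at hlz
    rw [hland1 w hw] at hlw
    rcases hcase with ⟨h0, h1, _⟩ | ⟨h0, h2, h1, _⟩
    · -- the cell was already land: the label array is unchanged
      subst h1
      have hlandz : pvGetB s.isLand z = true := by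
        rcases hlz with h | h
        · rw [h]; exact (hiso i hiN).2 (by rw [h0]; rfl)
        · exact h
      have hlandw : pvGetB s.isLand w = true := by
        rcases hlw with h | h
        · rw [h]; exact (hiso i hiN).2 (by rw [h0]; rfl)
        · exact h
      exact hroots z w hz hw hlandz hlandw
    · -- fresh cell: it forms its own singleton class with the fresh label
      have hlandiF : pvGetB s.isLand i = false := by
        have := hiso i hiN
        rw [h0] at this
        simp at this
        exact this
      have hrootxy : RootP s.parent i = i := by
        apply RootP_of_fix
        exact (hnl i (by unfold InR InN at *; rw [hlen]; omega) hlandiF).1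
      have hsep : ∀ e, InN rows cols e → pvGetB s.isLand e = true →
          RootP s.parent e ≠ i := by
        intro e he hle hcontra
        obtain ⟨lvl, hlok, hbnd⟩ := hwf
        have hInRe : InR s.parent e := by
          unfold InR InN at *
          rw [hlen]
          omega
        have := land_root s.parent s.isLand lvl hlok hnl e hInRe hle
        rw [hcontra, hlandiF] at this
        cases this
      by_cases hzx : z = i <;> by_cases hwx : w = i
      · subst hzx; subst hwx
        simp
      · subst hzx
        have hlandw : pvGetB s.isLand w = true := by
          rcases hlw with h | h
          · exact absurd h hwx
          · exact h
        rw [hlabxy, hlab1 w hw.1 hwx]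
        obtain ⟨v, hv⟩ : ∃ v, pvGetO label w = some v := by
          have h1 := (hiso w hw).1 hlandw
          cases h : pvGetO label w
          · rw [h] at h1; cases h1
          · exact ⟨_, rfl⟩
        have hvlt : v < nextId := hvb w v hv
        rw [hv, hrootxy]
        constructor
        · intro h
          exact absurd h.symm (hsep w hw hlandw)
        · intro h
          exfalso
          have := Option.some_inj.1 h
          omega
      · subst hwx
        have hlandz : pvGetB s.isLand z = true := by
          rcases hlz with h | h
          · exact absurd h hzx
          · exact h
        rw [hlabxy, hlab1 z hz.1 hzx]
        obtain ⟨v, hv⟩ : ∃ v, pvGetO label z = some v := by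
          have h1 := (hiso z hz).1 hlandz
          cases h : pvGetO label z
          · rw [h] at h1; cases h1
          · exact ⟨_, rfl⟩
        have hvlt : v < nextId := hvb z v hv
        rw [hv, hrootxy]
        constructor
        · intro h
          exact absurd h (hsep z hz hlandz)
        · intro h
          exfalso
          have := Option.some_inj.1 h
          omega
      · have hlandz : pvGetB s.isLand z = true := by
          rcases hlz with h | h
          · exact absurd h hzx
          · exact h
        have hlandw : pvGetB s.isLand w = true := by
          rcases hlw with h | h
          · exact absurd h hwx
          · exact h
        rw [hlab1 z hz.1 hzx, hlab1 w hw.1 hwx]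
        exact hroots z w hz hw hlandz hlandw
  · intro z v h
    rcases hcase with ⟨_, h1, h2⟩ | ⟨_, _, h1, h2'⟩
    · subst h1; subst h2
      exact hvb z v h
    · subst h1; subst h2'
      rcases pvGetO_set_cases label i (some nextId) z with hc | hc
      · rw [h] at hc
        have := Option.some_inj.1 hc
        omega
      · rw [h] at hc
        have := hvb z v hc.symm
        omega
  · rcases hcase with ⟨h0, _, h2⟩ | ⟨_, h2, _, h2'⟩
    · subst h2
      exact hvb i cur h0
    · subst h2; subst h2'; omega
  · rcases hcase with ⟨_, h1, _⟩ | ⟨_, _, h1, _⟩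
    · rw [h1]
    · rw [h1, length_pvSetO]

-- ---- the per-position bodies of the two ports, as named functions ----

def posA (rows cols : Int) (s : DSU) (xy : Int × Int) : DSU :=
  [((1 : Int), (0 : Int)), ((0 : Int), (1 : Int)), ((-1 : Int), (0 : Int)),
      ((0 : Int), (-1 : Int))].foldl
    (fun s d =>
      let nx := xy.1 + d.1
      let ny := xy.2 + d.2
      let nei := nx * cols + ny
      if 0 ≤ nx ∧ nx < rows ∧ 0 ≤ ny ∧ ny < cols ∧ pvGetB s.isLand nei = true then
        dsuUnion s (xy.1 * cols + xy.2) nei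
      else s)
    { s with isLand := pvSetB s.isLand (xy.1 * cols + xy.2) true, count := s.count + 1 }

def stepA (rows cols : Int) (st : DSU × List Int) (xy : Int × Int) : DSU × List Int :=
  (posA rows cols st.1 xy, st.2 ++ [(posA rows cols st.1 xy).count])

def dsu0 (rows cols : Int) : DSU :=
  { parent := PySem.List.pyRange 0 (rows * cols) 1
    rank := (PySem.List.pyRange 0 (rows * cols) 1).map (fun _ => (-1 : Int))
    count := 0
    isLand := (PySem.List.pyRange 0 (rows * cols) 1).map (fun _ => false) }

def posB (rows cols : Int) (label : List (Option Int)) (nextId cnt : Int)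
    (xy : Int × Int) : List (Option Int) × Int × Int :=
  let n := rows * cols
  let i := xy.1 * cols + xy.2
  let cln : Int × List (Option Int) × Int :=
    match pvGetO label i with
    | some c => (c, label, nextId)
    | none => (nextId, pvSetO label i (some nextId), nextId + 1)
  let cur := cln.1
  let label1 := cln.2.1
  let next1 := cln.2.2
  let neigh := [(xy.1 + 1, xy.2), (xy.1, xy.2 + 1), (xy.1 - 1, xy.2),
      (xy.1, xy.2 - 1)].foldl (fun acc (q : Int × Int) =>
      if 0 ≤ q.1 ∧ q.1 < rows ∧ 0 ≤ q.2 ∧ q.2 < cols then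
        match pvGetO label1 (q.1 * cols + q.2) with
        | some c => if c ∈ acc then acc else acc ++ [c]
        | none => acc
      else acc) ([] : List Int)
  let lc2 := neigh.foldl (fun (lc : List (Option Int) × Int) c =>
      if c ≠ cur then
        ((PySem.List.pyRange 0 n 1).foldl (fun lab k =>
            if pvGetO lab k = some c then pvSetO lab k (some cur) else lab) lc.1,
         lc.2 - 1)
      else lc) (label1, cnt + 1)
  (lc2.1, next1, lc2.2)

def stepB (rows cols : Int) (st : List (Option Int) × Int × Int × List Int)
    (xy : Int × Int) : List (Option Int) × Int × Int × List Int :=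
  ((posB rows cols st.1 st.2.1 st.2.2.1 xy).1, (posB rows cols st.1 st.2.1 st.2.2.1 xy).2.1,
   (posB rows cols st.1 st.2.1 st.2.2.1 xy).2.2,
   st.2.2.2 ++ [(posB rows cols st.1 st.2.1 st.2.2.1 xy).2.2])

theorem NOI2_foldA (rows cols : Int) (positions : List (Int × Int)) :
    NOI2 rows cols positions = (positions.foldl (stepA rows cols) (dsu0 rows cols, [])).2 := rfl

theorem NOI2_alt_foldB (rows cols : Int) (positions : List (Int × Int)) :
    NOI2_alt rows cols positions =
      (positions.foldl (stepB rows cols)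
        (List.replicate (rows * cols).toNat (none : Option Int), 0, 0, [])).2.2.2 := rfl

-- one position preserves the relational invariant and appends equal counts
theorem step_pos (rows cols : Int) (xy : Int × Int)
    (hq : -(rows * cols) ≤ xy.1 * cols + xy.2 ∧ xy.1 * cols + xy.2 < rows * cols)
    (s : DSU) (label : List (Option Int)) (nextId cnt : Int)
    (hR : RelAB rows cols s label nextId cnt) :
    RelAB rows cols (posA rows cols s xy) (posB rows cols label nextId cnt xy).1
      (posB rows cols label nextId cnt xy).2.1 (posB rows cols label nextId cnt xy).2.2 ∧
    (posA rows cols s xy).count = (posB rows cols label nextId cnt xy).2.2 := by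
  obtain ⟨x, y⟩ := xy
  simp only at hq
  have hpos : 0 < rows * cols := by omega
  set i := (if 0 ≤ x * cols + y then x * cols + y else x * cols + y + rows * cols) with hieq
  have hiN : InN rows cols i := by
    unfold InN
    rw [hieq]
    split <;> omega
  have hlablen : label.length = (rows * cols).toNat := by
    obtain ⟨hlen, _, _, hlab, _⟩ := hR
    rw [hlab, hlen]
  have hgetnorm : pvGetO label (x * cols + y) = pvGetO label i := by
    by_cases h0 : 0 ≤ x * cols + y
    · rw [hieq, if_pos h0]
    · rw [pvGetO_neg label (x * cols + y) (by rw [hlablen]; omega)]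
      rw [hlablen, hieq, if_neg h0]
      congr 1
      omega
  have hsetnorm : pvSetO label (x * cols + y) (some nextId) = pvSetO label i (some nextId) := by
    by_cases h0 : 0 ≤ x * cols + y
    · rw [hieq, if_pos h0]
    · rw [pvSetO_neg label (x * cols + y) (some nextId) (by rw [hlablen]; omega)]
      rw [hlablen, hieq, if_neg h0]
      congr 1
      omega
  obtain ⟨cur, label1, next1, hcase⟩ :
      ∃ cur label1 next1,
        ((pvGetO label i = some cur ∧ label1 = label ∧ next1 = nextId) ∨
          (pvGetO label i = none ∧ cur = nextId ∧
            label1 = pvSetO label i (some nextId) ∧ next1 = nextId + 1)) := by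
    cases h : pvGetO label i with
    | some c => exact ⟨c, label, nextId, Or.inl ⟨rfl, rfl, rfl⟩⟩
    | none => exact ⟨nextId, pvSetO label i (some nextId), nextId + 1,
        Or.inr ⟨rfl, rfl, rfl, rfl⟩⟩
  obtain ⟨hI0, hcur1, hvb1, hcurlt, hlablen1⟩ :=
    phase1 rows cols i hiN s label nextId cnt hR cur label1 next1 hcase
  have hset : pvSetB s.isLand (x * cols + y) true = pvSetB s.isLand i true := by
    by_cases h0 : 0 ≤ x * cols + y
    · rw [hieq, if_pos h0]
    · obtain ⟨hlen, hllen, _⟩ := hR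
      have hn : ((rows * cols).toNat : Int) = rows * cols := by omega
      rw [pvSetB_neg s.isLand (x * cols + y) true (by rw [hllen, hlen, hn]; omega)]
      rw [hllen, hlen, hn, hieq, if_neg h0]
  have hmap : [((1 : Int), (0 : Int)), ((0 : Int), (1 : Int)), ((-1 : Int), (0 : Int)),
      ((0 : Int), (-1 : Int))].map (fun d => (x + d.1, y + d.2)) =
      [(x + 1, y), (x, y + 1), (x - 1, y), (x, y - 1)] := by
    simp [Prod.ext_iff]
    omega
  have hposA : posA rows cols s (x, y) =
      ([(x + 1, y), (x, y + 1), (x - 1, y), (x, y - 1)]).foldl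
        (stepUC rows cols (x * cols + y))
        { s with isLand := pvSetB s.isLand i true, count := s.count + 1 } := by
    rw [← hset, ← hmap, List.foldl_map]
    rfl
  have hposB : posB rows cols label nextId cnt (x, y) =
      ((relFold (rows * cols) cur ([(x + 1, y), (x, y + 1), (x - 1, y), (x, y - 1)].foldl
          (stepN rows cols label1) []) (label1, cnt + 1)).1, next1,
        (relFold (rows * cols) cur ([(x + 1, y), (x, y + 1), (x - 1, y), (x, y - 1)].foldl
          (stepN rows cols label1) []) (label1, cnt + 1)).2) := by
    rcases hcase with ⟨h0, h1, h2⟩ | ⟨h0, h1, h2, h3⟩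
    · subst h1; subst h2
      simp only [posB]
      rw [hgetnorm, h0]
      rfl
    · subst h3; subst h1
      simp only [posB]
      rw [hgetnorm, hsetnorm, h0, ← h2]
      rfl
  have hc0 : -(rows * cols) ≤ x * cols + y ∧ x * cols + y < rows * cols := hq
  obtain ⟨hI, hndM⟩ := phase2 rows cols (x * cols + y) i cur (cnt + 1) label1 hc0 hieq hiN hcur1
    [(x + 1, y), (x, y + 1), (x - 1, y), (x, y - 1)]
    { s with isLand := pvSetB s.isLand i true, count := s.count + 1 } []
    hI0 List.nodup_nil
  set Mf := [(x + 1, y), (x, y + 1), (x - 1, y), (x, y - 1)].foldl (stepN rows cols label1) []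
    with hMf
  obtain ⟨hlen2, hllen2, hrk2, hwf2, hnl2, hcnt2, hlandxy2, hiso2, hroots2⟩ := hI
  have hlf : ((label1.length : Int)) = rows * cols := by
    rw [hlablen1, hlablen]
    omega
  obtain ⟨hL1, hLget, hLsnd⟩ := relFold_spec (rows * cols) cur Mf (label1, cnt + 1) hlf
  rw [hposA, hposB]
  dsimp only
  refine ⟨⟨hlen2, hllen2, hrk2, ?_, hwf2, hnl2, by rw [hcnt2, hLsnd], ?_, ?_, ?_⟩,
    by rw [hcnt2, hLsnd]⟩
  · rw [hlen2]
    omega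
  · intro z hz
    rw [hiso2 z hz, hLget z]
    cases h : pvGetO label1 z <;> simp [h]
  · intro z w hz hw hlz hlw
    rw [hroots2 z w hz hw hlz hlw]
    obtain ⟨v1, hv1⟩ : ∃ v1, pvGetO label1 z = some v1 := by
      have h1 := (hiso2 z hz).1 hlz
      cases h : pvGetO label1 z
      · rw [h] at h1; cases h1
      · exact ⟨_, rfl⟩
    obtain ⟨v2, hv2⟩ : ∃ v2, pvGetO label1 w = some v2 := by
      have h1 := (hiso2 w hw).1 hlw
      cases h : pvGetO label1 w
      · rw [h] at h1; cases h1
      · exact ⟨_, rfl⟩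
    rw [hLget z, hLget w, hv1, hv2]
    rw [ReqM_iff_gRel]
    simp
  · intro z v h
    rcases relFold_val (rows * cols) cur Mf (label1, cnt + 1) hlf z v h with h1 | h1
    · omega
    · exact hvb1 z v h1

theorem outer (rows cols : Int) :
    ∀ (ps : List (Int × Int)),
      (∀ q ∈ ps, -(rows * cols) ≤ q.1 * cols + q.2 ∧ q.1 * cols + q.2 < rows * cols) →
    ∀ (s : DSU) (label : List (Option Int)) (nextId cnt : Int) (res : List Int),
      RelAB rows cols s label nextId cnt →
      (ps.foldl (stepA rows cols) (s, res)).2 =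
        (ps.foldl (stepB rows cols) (label, nextId, cnt, res)).2.2.2 := by
  intro ps
  induction ps with
  | nil => intro _ s label nextId cnt res _; rfl
  | cons xy ps ih =>
    intro hall s label nextId cnt res hR
    rw [List.foldl_cons, List.foldl_cons]
    obtain ⟨hR2, hc2⟩ :=
      step_pos rows cols xy (hall xy List.mem_cons_self) s label nextId cnt hR
    have hA : stepA rows cols (s, res) xy =
        (posA rows cols s xy, res ++ [(posA rows cols s xy).count]) := rfl
    have hB : stepB rows cols (label, nextId, cnt, res) xy =
        ((posB rows cols label nextId cnt xy).1, (posB rows cols label nextId cnt xy).2.1,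
         (posB rows cols label nextId cnt xy).2.2,
         res ++ [(posB rows cols label nextId cnt xy).2.2]) := rfl
    rw [hA, hB, hc2]
    exact ih (fun q hq => hall q (List.mem_cons_of_mem xy hq)) _ _ _ _ _ hR2

theorem pvGetO_replicate (m : Nat) (z : Int) :
    pvGetO (List.replicate m (none : Option Int)) z = none := by
  unfold pvGetO
  split
  · simp
  · split
    · simp
    · rfl

theorem RelAB_init (rows cols : Int) :
    RelAB rows cols (dsu0 rows cols)
      (List.replicate (rows * cols).toNat (none : Option Int)) 0 0 := by
  have hlen : (PySem.List.pyRange 0 (rows * cols) 1).length = (rows * cols).toNat := by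
    rw [PySem.List.length_pyRange_one]
    simp
  have hself : ∀ z, InR (dsu0 rows cols).parent z → pvGetI (dsu0 rows cols).parent z = z := by
    intro z hz
    unfold InR at hz
    unfold dsu0 at hz ⊢
    simp only at hz ⊢
    unfold pvGetI
    rw [dif_pos ⟨hz.1, by omega⟩]
    rw [PySem.List.getElem_pyRange_one]
    omega
  have hfalse : ∀ z, pvGetB (dsu0 rows cols).isLand z = false := by
    intro z
    unfold pvGetB dsu0
    simp only
    by_cases h : 0 ≤ z ∧ z.toNat < ((PySem.List.pyRange 0 (rows * cols) 1).map
        (fun _ => false)).length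
    · rw [dif_pos h]
      simp
    · rw [dif_neg h]
      split
      · simp
      · rfl
  refine ⟨hlen, by simp [dsu0], by simp [dsu0], by simp [dsu0, hlen], ⟨fun _ => 0, ?_, ?_⟩,
    ?_, rfl, ?_, ?_, ?_⟩
  · intro z hz
    rw [hself z hz]
    exact ⟨hz, Or.inl rfl⟩
  · intro z hz
    unfold InR at hz
    show 0 < (dsu0 rows cols).parent.length
    omega
  · intro z hz _
    refine ⟨hself z hz, ?_⟩
    intro w hw hwz
    rw [hself w hw] at hwz
    exact hwz
  · intro z _
    rw [hfalse, pvGetO_replicate]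
    simp
  · intro z w _ _ hlz _
    rw [hfalse] at hlz
    cases hlz
  · intro z v h
    rw [pvGetO_replicate] at h
    cases h

-- ===== VERDICT (by name: the statement is the Claim_ definition above) =====
theorem NOI2_spec : Claim_equal_NOI2 := by
  intro rows cols positions _ hpre
  show NOI2 rows cols positions = NOI2_alt rows cols positions
  rcases hpre with hempty | ⟨hpos, hall⟩
  · subst hempty
    rfl
  · rw [NOI2_foldA, NOI2_alt_foldB]
    exact outer rows cols positions hall (dsu0 rows cols)
      (List.replicate (rows * cols).toNat (none : Option Int)) 0 0 []
      (RelAB_init rows cols)
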